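-- pv_equiv track=rewrite | github.com/jyc0011/backjoon | 프로그래머스/2/388353. 지게차와 크레인/지게차와 크레인.py | solution
-- ===== SOURCE A (Python) =====
-- from collections import defaultdict, deque
--
-- def solution(storage, reqs):
--     n, m = len(storage), len(storage[0])
--     grid = [list(row) for row in storage]
--     EMPTY = '0'
--     pos = defaultdict(set)
--     for r in range(n):
--         for c in range(m):
--             pos[grid[r][c]].add((r, c))
--     answer = n * m
--     for r_str in reqs:
--         typ = r_str[0]
--         if len(r_str) == 2:
--             locations = pos[typ].copy()
--             if not locations: continue
--
--             answer -= len(locations)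
--             for cr, cc in locations:
--                 grid[cr][cc] = EMPTY
--             pos[typ].clear()
--         else:
--             outside_cells = set()
--             q = deque()
--             for r in range(n):
--                 for c in range(m):
--                     if grid[r][c] == EMPTY and (r == 0 or r == n - 1 or c == 0 or c == m - 1):
--                         if (r, c) not in outside_cells:
--                             q.append((r, c))
--                             outside_cells.add((r, c))
--             while q:
--                 cr, cc = q.popleft()
--                 for dr, dc in [(0, 1), (0, -1), (1, 0), (-1, 0)]:
--                     nr, nc = cr + dr, cc + dc
--                     if 0 <= nr < n and 0 <= nc < m and grid[nr][nc] == EMPTY and (nr, nc) not in outside_cells: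
--                         outside_cells.add((nr, nc))
--                         q.append((nr, nc))
--             to_remove = []
--             locations = pos[typ].copy()
--             if not locations: continue
--             for cr, cc in locations:
--                 if cr == 0 or cr == n - 1 or cc == 0 or cc == m - 1:
--                     to_remove.append((cr, cc))
--                     continue
--                 is_accessible = False
--                 for dr, dc in [(0, 1), (0, -1), (1, 0), (-1, 0)]:
--                     if (cr + dr, cc + dc) in outside_cells:
--                         is_accessible = True
--                         break
--                 if is_accessible:
--                     to_remove.append((cr, cc))
--             if to_remove:
--                 answer -= len(to_remove)
--                 for cr, cc in to_remove:
--                     grid[cr][cc] = EMPTY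
--                     pos[typ].remove((cr, cc))
--     return answer
-- ===== SOURCE B (Python) =====
-- def solution(storage, reqs):
--     n, m = len(storage), len(storage[0])
--     # the warehouse as an ordered list of (cell, character) pairs; removal = filtering
--     cells = [((r, c), storage[r][c]) for r in range(n) for c in range(m)]
--     for req in reqs:
--         typ = req[0]
--         if len(req) == 2:
--             cells = [e for e in cells if e[1] != typ]
--         else:
--             occupied = {p for p, ch in cells if ch != '0'}
--             # outside-empty region by label propagation to a fixpoint (no queue/stack)
--             outside = set()
--             changed = True
--             while changed:
--                 changed = False
--                 for r in range(n):
--                     for c in range(m):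
--                         if (r, c) in occupied or (r, c) in outside:
--                             continue
--                         if r == 0 or r == n - 1 or c == 0 or c == m - 1 \
--                            or (r - 1, c) in outside or (r + 1, c) in outside \
--                            or (r, c - 1) in outside or (r, c + 1) in outside:
--                             outside.add((r, c))
--                             changed = True
--             def reachable(p):
--                 r, c = p
--                 return (r == 0 or r == n - 1 or c == 0 or c == m - 1
--                         or (r - 1, c) in outside or (r + 1, c) in outside
--                         or (r, c - 1) in outside or (r, c + 1) in outside)
--             cells = [e for e in cells if not (e[1] == typ and reachable(e[0]))]
--     return len(cells)
-- ===== Notes on version B (the rewrite author's own statement) =====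
-- stated objective: alternative
-- what changed: B replaces A's mutable grid + per-type position index + BFS flood fill with a single ordered list of (cell, char) pairs that is filtered per request, and computes the outside-empty region by label-propagation sweeps to a fixpoint instead of a queue-based BFS; the answer is the final list length instead of a maintained counter.
import Mathlib
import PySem

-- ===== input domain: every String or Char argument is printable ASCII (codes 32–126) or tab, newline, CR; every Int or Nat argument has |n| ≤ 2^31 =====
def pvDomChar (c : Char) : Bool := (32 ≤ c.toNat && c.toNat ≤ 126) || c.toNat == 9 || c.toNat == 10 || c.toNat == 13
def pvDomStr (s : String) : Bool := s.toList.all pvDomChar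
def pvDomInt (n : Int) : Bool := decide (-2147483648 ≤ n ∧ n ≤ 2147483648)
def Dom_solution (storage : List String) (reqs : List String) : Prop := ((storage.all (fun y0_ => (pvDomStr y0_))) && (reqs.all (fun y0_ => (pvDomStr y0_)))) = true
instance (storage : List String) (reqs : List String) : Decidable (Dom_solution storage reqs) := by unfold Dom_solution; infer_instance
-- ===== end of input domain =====

-- B replaces A's mutable grid + per-type position index + BFS flood fill with one ordered list of
-- (cell, char) pairs that is filtered per request, and a label-propagation fixpoint sweep for the
-- outside-empty region; the answer is the final list length (objective: alternative; return-value
-- equivalence, neither version mutates its arguments).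

-- ===== PORT A =====

-- the four move directions [(0,1),(0,-1),(1,0),(-1,0)] of A
def pvDirs : List (Int × Int) := [(0, 1), (0, -1), (1, 0), (-1, 0)]

-- grid[r][c] (indices are always in range where A reads/writes; out of range yields a junk value)
def gridGet (g : List (List Char)) (r c : Int) : Char :=
  (PySem.List.pyGet? ((PySem.List.pyGet? g r).getD []) c).getD ' '

-- grid[r][c] = ch
def gridSet (g : List (List Char)) (r c : Int) (ch : Char) : List (List Char) :=
  PySem.List.pySetD g r (PySem.List.pySetD ((PySem.List.pyGet? g r).getD []) c ch)

-- the BFS 'while q:' loop; fuel makes it total (it is always sufficient, see the lemmas below)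
def bfsA (n m : Int) (g : List (List Char)) :
    Nat → List (Int × Int) → PySem.Set (Int × Int) → PySem.Set (Int × Int)
  | 0, _, vis => vis
  | _ + 1, [], vis => vis
  | fuel + 1, p :: q, vis =>
    let qv := pvDirs.foldl (fun (qv : List (Int × Int) × PySem.Set (Int × Int)) d =>
      let np := (p.1 + d.1, p.2 + d.2)
      if 0 ≤ np.1 ∧ np.1 < n ∧ 0 ≤ np.2 ∧ np.2 < m ∧ gridGet g np.1 np.2 = '0' ∧ ¬ np ∈ qv.2
      then (qv.1 ++ [np], PySem.Set.add qv.2 np) else qv) (q, vis)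
    bfsA n m g fuel qv.1 qv.2

-- one request r_str on state (grid, pos, answer)
def stepA (n m : Int)
    (st : List (List Char) × PySem.Dict Char (PySem.Set (Int × Int)) × Int) (rs : String) :
    List (List Char) × PySem.Dict Char (PySem.Set (Int × Int)) × Int :=
  let grid := st.1
  let pos := st.2.1
  let answer := st.2.2
  let typ : Char := (PySem.Str.pyGet? rs 0).getD ' '   -- r_str[0]; Pre_ excludes empty request strings
  if PySem.Str.len rs = 2 then
    let locations : PySem.Set (Int × Int) := pos.getD typ []
    if locations = [] then st
    else
      let answer := answer - PySem.List.len locations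
      let grid := locations.foldl (fun g p => gridSet g p.1 p.2 '0') grid
      let pos := pos.insert typ []            -- pos[typ].clear()
      (grid, pos, answer)
  else
    -- collect the empty border cells into (queue, outside_cells)
    let qv : List (Int × Int) × PySem.Set (Int × Int) :=
      (PySem.List.pyRange 0 n 1).foldl (fun qv r =>
        (PySem.List.pyRange 0 m 1).foldl (fun (qv : List (Int × Int) × PySem.Set (Int × Int)) c =>
          if gridGet grid r c = '0' ∧ (r = 0 ∨ r = n - 1 ∨ c = 0 ∨ c = m - 1) ∧ ¬ (r, c) ∈ qv.2
          then (qv.1 ++ [(r, c)], PySem.Set.add qv.2 (r, c)) else qv) qv) ([], [])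
    let outside : PySem.Set (Int × Int) :=
      bfsA n m grid (5 * (n.toNat * m.toNat) + qv.1.length + 1) qv.1 qv.2
    let locations : PySem.Set (Int × Int) := pos.getD typ []
    if locations = [] then st
    else
      let toRemove : List (Int × Int) := locations.foldl (fun acc p =>
        if p.1 = 0 ∨ p.1 = n - 1 ∨ p.2 = 0 ∨ p.2 = m - 1 then acc ++ [p]
        else if pvDirs.any (fun d => PySem.Set.contains outside (p.1 + d.1, p.2 + d.2)) then acc ++ [p]
        else acc) []
      if toRemove = [] then st
      else
        let answer := answer - PySem.List.len toRemove
        let grid := toRemove.foldl (fun g p => gridSet g p.1 p.2 '0') grid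
        let pos := pos.insert typ
          (toRemove.foldl (fun (s : PySem.Set (Int × Int)) p => (PySem.Set.remove? s p).getD s)
            (pos.getD typ []))
        (grid, pos, answer)

def solution (storage : List String) (reqs : List String) : Int :=
  let n : Int := PySem.List.len storage
  let m : Int := PySem.Str.len ((PySem.List.pyGet? storage 0).getD "")  -- storage[0]; Pre_ excludes empty storage
  let grid : List (List Char) := storage.map (·.toList)
  let pos : PySem.Dict Char (PySem.Set (Int × Int)) :=
    (PySem.List.pyRange 0 n 1).foldl (fun pos r =>
      (PySem.List.pyRange 0 m 1).foldl (fun (pos : PySem.Dict Char (PySem.Set (Int × Int))) c =>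
        pos.modify (gridGet grid r c) [] (fun s => PySem.Set.add s (r, c))) pos) PySem.Dict.empty
  let fin := reqs.foldl (stepA n m) (grid, pos, n * m)
  fin.2.2

-- ===== PORT B =====

-- storage[r][c]
def strGet (storage : List String) (r c : Int) : Char :=
  (PySem.Str.pyGet? ((PySem.List.pyGet? storage r).getD "") c).getD ' '

-- reachable(p): on the border, or a von-Neumann neighbour lies in the outside region
def reachableB (n m : Int) (out : PySem.Set (Int × Int)) (p : Int × Int) : Bool :=
  decide (p.1 = 0 ∨ p.1 = n - 1 ∨ p.2 = 0 ∨ p.2 = m - 1 ∨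
    (p.1 - 1, p.2) ∈ out ∨ (p.1 + 1, p.2) ∈ out ∨ (p.1, p.2 - 1) ∈ out ∨ (p.1, p.2 + 1) ∈ out)

-- one full pass of the two nested for-loops of the while-body; state = (outside, changed)
def sweepB (n m : Int) (occ : PySem.Set (Int × Int))
    (st : PySem.Set (Int × Int) × Bool) : PySem.Set (Int × Int) × Bool :=
  (PySem.List.pyRange 0 n 1).foldl (fun st r =>
    (PySem.List.pyRange 0 m 1).foldl (fun (st : PySem.Set (Int × Int) × Bool) c =>
      if (r, c) ∈ occ ∨ (r, c) ∈ st.1 then st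
      else if reachableB n m st.1 (r, c) then (PySem.Set.add st.1 (r, c), true) else st) st) st

-- the 'while changed:' loop; fuel makes it total (always sufficient, see the lemmas below)
def fixB (n m : Int) (occ : PySem.Set (Int × Int)) :
    Nat → PySem.Set (Int × Int) → PySem.Set (Int × Int)
  | 0, out => out
  | fuel + 1, out =>
    let st := sweepB n m occ (out, false)
    if st.2 then fixB n m occ fuel st.1 else st.1

-- one request on the list of (cell, char) pairs
def stepBB (n m : Int) (cells : List ((Int × Int) × Char)) (rs : String) :
    List ((Int × Int) × Char) :=
  let typ : Char := (PySem.Str.pyGet? rs 0).getD ' '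
  if PySem.Str.len rs = 2 then
    cells.filter (fun e => decide (e.2 ≠ typ))
  else
    let occ : PySem.Set (Int × Int) :=
      cells.foldl (fun s e => if e.2 ≠ '0' then PySem.Set.add s e.1 else s) []
    let out := fixB n m occ (n.toNat * m.toNat + 1) []
    cells.filter (fun e => decide (¬ (e.2 = typ ∧ reachableB n m out e.1 = true)))

def solution_alt (storage : List String) (reqs : List String) : Int :=
  let n : Int := PySem.List.len storage
  let m : Int := PySem.Str.len ((PySem.List.pyGet? storage 0).getD "")
  let cells : List ((Int × Int) × Char) :=
    (PySem.List.pyRange 0 n 1).flatMap (fun r =>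
      (PySem.List.pyRange 0 m 1).map (fun c => ((r, c), strGet storage r c)))
  let fin := reqs.foldl (stepBB n m) cells
  PySem.List.len fin

-- ===== PRECONDITION & SPEC =====
-- Pre_ excludes exactly the inputs where A raises an IndexError: empty storage (storage[0]),
-- a storage row shorter than the first row (grid[r][c] with c < m), and an empty request string (r_str[0]).
def Pre_solution (storage : List String) (reqs : List String) : Prop :=
  storage ≠ [] ∧
  (∀ s ∈ storage, PySem.Str.len ((PySem.List.pyGet? storage 0).getD "") ≤ PySem.Str.len s) ∧
  (∀ r ∈ reqs, r ≠ "")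

instance (storage : List String) (reqs : List String) : Decidable (Pre_solution storage reqs) := by
  unfold Pre_solution; infer_instance

def pvWitness_solution : List String × List String :=
  (["A0B", "0AB", "BB0"], ["B", "A0", "CC"])

def Spec_solution (storage : List String) (reqs : List String) (out : Int) : Prop := out = solution_alt storage reqs
instance (storage : List String) (reqs : List String) (out : Int) : Decidable (Spec_solution storage reqs out) := by unfold Spec_solution; infer_instance

-- ===== CLAIM (what is proved, stated in full; the proofs are below) =====
def Claim_equal_solution : Prop := ∀ (storage : List String) (reqs : List String), Dom_solution storage reqs → Pre_solution storage reqs → Spec_solution storage reqs (solution storage reqs)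

-- ===== LEMMAS AND PROOFS =====

-- ---------- abstract reachability vocabulary ----------

def inR (n m : Int) (p : Int × Int) : Prop := 0 ≤ p.1 ∧ p.1 < n ∧ 0 ≤ p.2 ∧ p.2 < m

def borderP (n m : Int) (p : Int × Int) : Prop := p.1 = 0 ∨ p.1 = n - 1 ∨ p.2 = 0 ∨ p.2 = m - 1

def nbrs (p : Int × Int) : List (Int × Int) := pvDirs.map (fun d => (p.1 + d.1, p.2 + d.2))

def okc (n m : Int) (e : Int × Int → Prop) (p : Int × Int) : Prop := inR n m p ∧ e p

def stepR (n m : Int) (e : Int × Int → Prop) (p q : Int × Int) : Prop :=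
  q ∈ nbrs p ∧ okc n m e q

def Reach (n m : Int) (e : Int × Int → Prop) (x : Int × Int) : Prop :=
  ∃ s, okc n m e s ∧ borderP n m s ∧ Relation.ReflTransGen (stepR n m e) s x

def allCells (n m : Int) : List (Int × Int) :=
  (PySem.List.pyRange 0 n 1).flatMap (fun r => (PySem.List.pyRange 0 m 1).map (fun c => (r, c)))

theorem mem_allCells (n m : Int) (p : Int × Int) : p ∈ allCells n m ↔ inR n m p := by
  cases p with
  | mk a b =>
    simp only [allCells, inR, List.mem_flatMap, List.mem_map, PySem.List.mem_pyRange_one]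
    constructor
    · rintro ⟨r, ⟨h1, h2⟩, c, ⟨h3, h4⟩, h⟩
      obtain ⟨rfl, rfl⟩ : r = a ∧ c = b := by simpa [Prod.ext_iff] using h
      exact ⟨h1, h2, h3, h4⟩
    · rintro ⟨h1, h2, h3, h4⟩
      exact ⟨a, ⟨h1, h2⟩, b, ⟨h3, h4⟩, rfl⟩

theorem nodup_allCells (n m : Int) : (allCells n m).Nodup := by
  rw [allCells, List.nodup_flatMap]
  refine ⟨fun r _ => ?_, ?_⟩
  · exact (PySem.List.nodup_pyRange_one 0 m).map (fun _ _ h => congrArg Prod.snd h)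
  · refine List.Pairwise.imp_of_mem ?_ ((PySem.List.nodup_pyRange_one 0 n).imp (fun h => h))
    intro r₁ r₂ _ _ hne x hx₁ hx₂
    simp only [List.mem_map] at hx₁ hx₂
    obtain ⟨c₁, _, rfl⟩ := hx₁
    obtain ⟨c₂, _, h⟩ := hx₂
    exact hne (congrArg Prod.fst h).symm

theorem length_allCells (n m : Int) : (allCells n m).length = n.toNat * m.toNat := by
  rw [allCells, List.length_flatMap]
  simp only [List.length_map, PySem.List.length_pyRange_one, List.map_const',
    List.sum_replicate, smul_eq_mul]
  simp

theorem mem_nbrs_iff (q x : Int × Int) : x ∈ nbrs q ↔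
    x = (q.1, q.2 + 1) ∨ x = (q.1, q.2 - 1) ∨ x = (q.1 + 1, q.2) ∨ x = (q.1 - 1, q.2) := by
  simp only [nbrs, pvDirs, List.map_cons, List.map_nil, List.mem_cons, List.not_mem_nil,
    or_false, Prod.ext_iff]
  omega

theorem Reach_tail (n m : Int) (e : Int × Int → Prop) (q p : Int × Int)
    (hq : Reach n m e q) (hp : p ∈ nbrs q) (hok : okc n m e p) : Reach n m e p := by
  obtain ⟨s, hoks, hbs, hpath⟩ := hq
  exact ⟨s, hoks, hbs, hpath.tail ⟨hp, hok⟩⟩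

theorem countP_lt_countP {α : Type} (l : List α) (P Q : α → Bool)
    (himp : ∀ x, Q x = true → P x = true) (y : α) (hy : y ∈ l) (hPy : P y = true)
    (hQy : Q y = false) : l.countP Q < l.countP P := by
  induction l with
  | nil => simp at hy
  | cons a l ih =>
    rcases List.mem_cons.1 hy with rfl | hy
    · have := List.countP_mono_left (l := l) (p := Q) (q := P) (fun x _ h => himp x h)
      simp [hPy, hQy]
      omega
    · have := ih hy
      have h2 : (if Q a then 1 else 0) ≤ (if P a then 1 else 0) := by
        by_cases h : Q a = true
        · simp [h, himp a h]
        · simp [h]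
      simp only [List.countP_cons]
      omega

-- ---------- A's worklist (BFS flood fill) theory ----------

def Ecnt (n m : Int) (e : Int × Int → Prop) [DecidablePred e] (vis : List (Int × Int)) : Nat :=
  (allCells n m).countP (fun p => decide (e p ∧ p ∉ vis))

def wlStep (n m : Int) (e : Int × Int → Prop) [DecidablePred e] (p : Int × Int)
    (qv : List (Int × Int) × PySem.Set (Int × Int)) (d : Int × Int) :
    List (Int × Int) × PySem.Set (Int × Int) :=
  let np := (p.1 + d.1, p.2 + d.2)
  if 0 ≤ np.1 ∧ np.1 < n ∧ 0 ≤ np.2 ∧ np.2 < m ∧ e np ∧ ¬ np ∈ qv.2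
  then (qv.1 ++ [np], PySem.Set.add qv.2 np) else qv

theorem wlFold_facts (n m : Int) (e : Int × Int → Prop) [inst : DecidablePred e]
    (p : Int × Int) :
    ∀ (ds : List (Int × Int)) (q : List (Int × Int)) (vis : PySem.Set (Int × Int)),
      (∀ x ∈ q, x ∈ vis) → q.Nodup → vis.Nodup →
      (∀ x ∈ vis, okc n m e x) →
      (∀ x ∈ vis, x ∈ (ds.foldl (wlStep n m e p) (q, vis)).2) ∧
      (∀ x, x ∈ (ds.foldl (wlStep n m e p) (q, vis)).2 ↔
        x ∈ vis ∨ (∃ d ∈ ds, x = (p.1 + d.1, p.2 + d.2) ∧ okc n m e x)) ∧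
      (∀ x, x ∈ (ds.foldl (wlStep n m e p) (q, vis)).1 ↔
        x ∈ q ∨ (x ∈ (ds.foldl (wlStep n m e p) (q, vis)).2 ∧ x ∉ vis)) ∧
      (ds.foldl (wlStep n m e p) (q, vis)).1.Nodup ∧
      (ds.foldl (wlStep n m e p) (q, vis)).2.Nodup ∧
      (∀ x ∈ (ds.foldl (wlStep n m e p) (q, vis)).2, okc n m e x) ∧
      (∀ x ∈ (ds.foldl (wlStep n m e p) (q, vis)).1,
        x ∈ (ds.foldl (wlStep n m e p) (q, vis)).2) ∧
      5 * Ecnt n m e (ds.foldl (wlStep n m e p) (q, vis)).2 +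
        (ds.foldl (wlStep n m e p) (q, vis)).1.length ≤
        5 * Ecnt n m e vis + q.length := by
  intro ds
  induction ds with
  | nil =>
    intro q vis hqv hnq hnv hok
    refine ⟨fun x hx => hx, ?_, ?_, hnq, hnv, hok, hqv, le_refl _⟩
    · intro x; simp
    · intro x; simp only [List.foldl_nil]
      constructor
      · intro hx; exact Or.inl hx
      · rintro (hx | ⟨hx2, hxv⟩)
        · exact hx
        · exact absurd hx2 hxv
  | cons d ds ih =>
    intro q vis hqv hnq hnv hok
    rw [List.foldl_cons]
    by_cases hc : 0 ≤ p.1 + d.1 ∧ p.1 + d.1 < n ∧ 0 ≤ p.2 + d.2 ∧ p.2 + d.2 < m ∧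
        e (p.1 + d.1, p.2 + d.2) ∧ ¬ (p.1 + d.1, p.2 + d.2) ∈ vis
    · -- the neighbour is pushed
      have hstep : wlStep n m e p (q, vis) d =
          (q ++ [(p.1 + d.1, p.2 + d.2)], vis ++ [(p.1 + d.1, p.2 + d.2)]) := by
        rw [wlStep]
        rw [if_pos hc, PySem.Set.add_of_not_mem hc.2.2.2.2.2]
      set np : Int × Int := (p.1 + d.1, p.2 + d.2) with hnp
      have hoknp : okc n m e np := ⟨⟨hc.1, hc.2.1, hc.2.2.1, hc.2.2.2.1⟩, hc.2.2.2.2.1⟩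
      have hnpv : np ∉ vis := hc.2.2.2.2.2
      have hnpq : np ∉ q := fun h => hnpv (hqv _ h)
      have hqv' : ∀ x ∈ q ++ [np], x ∈ vis ++ [np] := by
        intro x hx
        rcases List.mem_append.1 hx with h | h
        · exact List.mem_append_left _ (hqv _ h)
        · exact List.mem_append_right _ h
      have hnq' : (q ++ [np]).Nodup := by
        rw [List.nodup_append]
        refine ⟨hnq, List.nodup_singleton _, ?_⟩
        intro a ha
        simp only [List.mem_singleton]
        intro b hb
        subst hb
        intro he
        exact hnpq (he ▸ ha)
      have hnv' : (vis ++ [np]).Nodup := by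
        rw [← PySem.Set.add_of_not_mem hnpv]
        exact PySem.Set.nodup_add _ _ hnv
      have hok' : ∀ x ∈ vis ++ [np], okc n m e x := by
        intro x hx
        rcases List.mem_append.1 hx with h | h
        · exact hok _ h
        · rw [List.mem_singleton.1 h]; exact hoknp
      obtain ⟨c1, c2, c3, c4, c5, c6, c7, c8⟩ := ih (q ++ [np]) (vis ++ [np]) hqv' hnq' hnv' hok'
      rw [hstep]
      have hvs : ∀ x ∈ vis, x ∈ vis ++ [np] := fun x hx => List.mem_append_left _ hx
      refine ⟨fun x hx => c1 x (hvs x hx), ?_, ?_, c4, c5, c6, c7, ?_⟩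
      · intro x
        rw [c2 x]
        constructor
        · rintro (hx | ⟨d', hd', rfl, hokx⟩)
          · rcases List.mem_append.1 hx with h | h
            · exact Or.inl h
            · obtain rfl := List.mem_singleton.1 h
              exact Or.inr ⟨d, List.mem_cons_self .., hnp, hoknp⟩
          · exact Or.inr ⟨d', List.mem_cons_of_mem _ hd', rfl, hokx⟩
        · rintro (hx | ⟨d', hd', rfl, hokx⟩)
          · exact Or.inl (hvs x hx)
          · rcases List.mem_cons.1 hd' with rfl | hd'
            · exact Or.inl (List.mem_append_right _ (List.mem_singleton_self _))
            · exact Or.inr ⟨d', hd', rfl, hokx⟩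
      · intro x
        rw [c3 x]
        constructor
        · rintro (hx | ⟨hx2, hxv⟩)
          · rcases List.mem_append.1 hx with h | h
            · exact Or.inl h
            · obtain rfl := List.mem_singleton.1 h
              exact Or.inr ⟨c1 _ (List.mem_append_right _ (List.mem_singleton_self _)), hnpv⟩
          · exact Or.inr ⟨hx2, fun h => hxv (hvs _ h)⟩
        · rintro (hx | ⟨hx2, hxv⟩)
          · exact Or.inl (List.mem_append_left _ hx)
          · by_cases hxvis' : x ∈ vis ++ [np]
            · rcases List.mem_append.1 hxvis' with h | h
              · exact absurd h hxv
              · exact Or.inl (List.mem_append_right _ h)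
            · exact Or.inr ⟨hx2, hxvis'⟩
      · have hlt : Ecnt n m e (vis ++ [np]) < Ecnt n m e vis := by
          unfold Ecnt
          exact countP_lt_countP (allCells n m)
            (fun x => decide (e x ∧ x ∉ vis)) (fun x => decide (e x ∧ x ∉ vis ++ [np]))
            (by
              intro x hx
              simp only [decide_eq_true_eq] at hx ⊢
              exact ⟨hx.1, fun h => hx.2 (hvs _ h)⟩)
            np ((mem_allCells n m np).2 hoknp.1)
            (by
              simp only [decide_eq_true_eq]
              exact ⟨hoknp.2, hnpv⟩)
            (by
              simp only [decide_eq_false_iff_not]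
              intro hcon
              exact hcon.2 (List.mem_append_right _ (List.mem_singleton_self _)))
        have hql : (q ++ [np]).length = q.length + 1 := by simp
        omega
    · -- nothing happens at this direction
      have hstep : wlStep n m e p (q, vis) d = (q, vis) := by
        rw [wlStep, if_neg hc]
      obtain ⟨c1, c2, c3, c4, c5, c6, c7, c8⟩ := ih q vis hqv hnq hnv hok
      rw [hstep]
      refine ⟨c1, ?_, c3, c4, c5, c6, c7, c8⟩
      intro x
      rw [c2 x]
      constructor
      · rintro (hx | ⟨d', hd', rfl, hokx⟩)
        · exact Or.inl hx
        · exact Or.inr ⟨d', List.mem_cons_of_mem _ hd', rfl, hokx⟩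
      · rintro (hx | ⟨d', hd', rfl, hokx⟩)
        · exact Or.inl hx
        · rcases List.mem_cons.1 hd' with rfl | hd'
          · -- this direction was not pushed: the neighbour must already be visited
            left
            by_contra hxv
            exact hc ⟨hokx.1.1, hokx.1.2.1, hokx.1.2.2.1, hokx.1.2.2.2, hokx.2, hxv⟩
          · exact Or.inr ⟨d', hd', rfl, hokx⟩

def wl (n m : Int) (e : Int × Int → Prop) [DecidablePred e] :
    Nat → List (Int × Int) → PySem.Set (Int × Int) → PySem.Set (Int × Int)
  | 0, _, vis => vis
  | _ + 1, [], vis => vis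
  | fuel + 1, p :: q, vis =>
    let qv := pvDirs.foldl (wlStep n m e p) (q, vis)
    wl n m e fuel qv.1 qv.2

theorem wl_run (n m : Int) (e : Int × Int → Prop) [inst : DecidablePred e] :
    ∀ (fuel : Nat) (q : List (Int × Int)) (vis : PySem.Set (Int × Int)),
      5 * Ecnt n m e vis + q.length < fuel →
      q.Nodup → (∀ x ∈ q, x ∈ vis) → vis.Nodup →
      (∀ x ∈ vis, okc n m e x) →
      (∀ x ∈ vis, x ∉ q → ∀ y ∈ nbrs x, okc n m e y → y ∈ vis) →
      (∀ x ∈ vis, x ∈ wl n m e fuel q vis) ∧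
      (∀ x ∈ wl n m e fuel q vis, ∀ y ∈ nbrs x, okc n m e y → y ∈ wl n m e fuel q vis) := by
  intro fuel
  induction fuel with
  | zero => intro q vis hfuel; omega
  | succ fuel ih =>
    intro q vis hfuel hnq hqv hnv hok hcl
    match q with
    | [] =>
      rw [wl]
      exact ⟨fun x hx => hx, fun x hx y hy hoky => hcl x hx (List.not_mem_nil) y hy hoky⟩
    | p :: q =>
      rw [wl]
      obtain ⟨c1, c2, c3, c4, c5, c6, c7, c8⟩ :=
        wlFold_facts n m e p pvDirs q vis
          (fun x hx => hqv x (List.mem_cons_of_mem _ hx)) hnq.of_cons hnv hok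
      set qv := pvDirs.foldl (wlStep n m e p) (q, vis) with hqvdef
      have hpvis : p ∈ vis := hqv p (List.mem_cons_self ..)
      have hfuel' : 5 * Ecnt n m e qv.2 + qv.1.length < fuel := by
        have := c8
        simp only [List.length_cons] at hfuel
        omega
      have hcl' : ∀ x ∈ qv.2, x ∉ qv.1 → ∀ y ∈ nbrs x, okc n m e y → y ∈ qv.2 := by
        intro x hx hxq y hy hoky
        have hxvis : x ∈ vis := by
          rcases (c2 x).1 hx with h | h
          · exact h
          · by_contra hxv
            exact hxq ((c3 x).2 (Or.inr ⟨hx, hxv⟩))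
        by_cases hxp : x = p
        · subst hxp
          obtain ⟨d, hd, rfl⟩ := List.mem_map.1 hy
          exact (c2 _).2 (Or.inr ⟨d, hd, rfl, hoky⟩)
        · have hxnotin : x ∉ p :: q := by
            intro h
            rcases List.mem_cons.1 h with h | h
            · exact hxp h
            · exact hxq ((c3 x).2 (Or.inl h))
          exact c1 y (hcl x hxvis hxnotin y hy hoky)
      obtain ⟨d1, d2⟩ := ih qv.1 qv.2 hfuel' c4 c7 c5 c6 hcl'
      exact ⟨fun x hx => d1 x (c1 x hx), d2⟩

theorem wlFold_sound (n m : Int) (e : Int × Int → Prop) [inst : DecidablePred e]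
    (P : Int × Int → Prop)
    (hstep : ∀ x y, P x → y ∈ nbrs x → okc n m e y → P y)
    (p : Int × Int) (hPp : P p) :
    ∀ (ds : List (Int × Int)), (∀ d ∈ ds, d ∈ pvDirs) →
      ∀ (q : List (Int × Int)) (vis : PySem.Set (Int × Int)),
      (∀ x ∈ vis, P x) → (∀ x ∈ q, x ∈ vis) →
      (∀ x ∈ (ds.foldl (wlStep n m e p) (q, vis)).2, P x) ∧
      (∀ x ∈ (ds.foldl (wlStep n m e p) (q, vis)).1,
        x ∈ (ds.foldl (wlStep n m e p) (q, vis)).2) := by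
  intro ds
  induction ds with
  | nil =>
    intro _ q vis hP hqv
    exact ⟨hP, hqv⟩
  | cons d ds ih =>
    intro hds q vis hP hqv
    rw [List.foldl_cons]
    by_cases hc : 0 ≤ p.1 + d.1 ∧ p.1 + d.1 < n ∧ 0 ≤ p.2 + d.2 ∧ p.2 + d.2 < m ∧
        e (p.1 + d.1, p.2 + d.2) ∧ ¬ (p.1 + d.1, p.2 + d.2) ∈ vis
    · have hstep' : wlStep n m e p (q, vis) d =
          (q ++ [(p.1 + d.1, p.2 + d.2)], PySem.Set.add vis (p.1 + d.1, p.2 + d.2)) := by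
        rw [wlStep, if_pos hc]
      rw [hstep']
      have hoknp : okc n m e (p.1 + d.1, p.2 + d.2) :=
        ⟨⟨hc.1, hc.2.1, hc.2.2.1, hc.2.2.2.1⟩, hc.2.2.2.2.1⟩
      have hnbr : (p.1 + d.1, p.2 + d.2) ∈ nbrs p :=
        List.mem_map.2 ⟨d, hds d (List.mem_cons_self ..), rfl⟩
      refine ih (fun d' hd' => hds d' (List.mem_cons_of_mem _ hd')) _ _ ?_ ?_
      · intro x hx
        rcases (PySem.Set.mem_add _ _ _).1 hx with h | rfl
        · exact hP x h
        · exact hstep p _ hPp hnbr hoknp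
      · intro x hx
        rcases List.mem_append.1 hx with h | h
        · exact (PySem.Set.mem_add _ _ _).2 (Or.inl (hqv x h))
        · obtain rfl := List.mem_singleton.1 h
          exact (PySem.Set.mem_add _ _ _).2 (Or.inr rfl)
    · have hstep' : wlStep n m e p (q, vis) d = (q, vis) := by
        rw [wlStep, if_neg hc]
      rw [hstep']
      exact ih (fun d' hd' => hds d' (List.mem_cons_of_mem _ hd')) q vis hP hqv

theorem wl_sound (n m : Int) (e : Int × Int → Prop) [inst : DecidablePred e]
    (P : Int × Int → Prop)
    (hstep : ∀ x y, P x → y ∈ nbrs x → okc n m e y → P y) :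
    ∀ (fuel : Nat) (q : List (Int × Int)) (vis : PySem.Set (Int × Int)),
      (∀ x ∈ vis, P x) → (∀ x ∈ q, x ∈ vis) →
      ∀ x ∈ wl n m e fuel q vis, P x := by
  intro fuel
  induction fuel with
  | zero => intro q vis hP _ x hx; exact hP x hx
  | succ fuel ih =>
    intro q vis hP hqv x hx
    match q with
    | [] => rw [wl] at hx; exact hP x hx
    | p :: q =>
      rw [wl] at hx
      obtain ⟨s1, s2⟩ := wlFold_sound n m e P hstep p
        (hP p (hqv p (List.mem_cons_self ..))) pvDirs (fun d hd => hd) q vis hP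
        (fun y hy => hqv y (List.mem_cons_of_mem _ hy))
      exact ih _ _ s1 s2 x hx

theorem wl_mem_iff (n m : Int) (e : Int × Int → Prop) [inst : DecidablePred e]
    (fuel : Nat) (q₀ : List (Int × Int)) (vis₀ : PySem.Set (Int × Int))
    (hq₀ : ∀ x, x ∈ q₀ ↔ x ∈ vis₀) (hnq₀ : q₀.Nodup) (hnv₀ : vis₀.Nodup)
    (hseed : ∀ x, x ∈ vis₀ ↔ (okc n m e x ∧ borderP n m x))
    (hfuel : 5 * Ecnt n m e vis₀ + q₀.length < fuel) :
    ∀ x, x ∈ wl n m e fuel q₀ vis₀ ↔ Reach n m e x := by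
  have hok₀ : ∀ x ∈ vis₀, okc n m e x := fun x hx => ((hseed x).1 hx).1
  obtain ⟨r1, r2⟩ := wl_run n m e fuel q₀ vis₀ hfuel hnq₀
    (fun x hx => (hq₀ x).1 hx) hnv₀ hok₀
    (fun x hx hxq => absurd ((hq₀ x).2 hx) hxq)
  intro x
  constructor
  · intro hx
    refine wl_sound n m e (Reach n m e) ?_ fuel q₀ vis₀ ?_
      (fun y hy => (hq₀ y).1 hy) x hx
    · rintro a b ⟨s, hoks, hbs, hpath⟩ hb hokb
      exact ⟨s, hoks, hbs, hpath.tail ⟨hb, hokb⟩⟩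
    · intro y hy
      obtain ⟨hoky, hby⟩ := (hseed y).1 hy
      exact ⟨y, hoky, hby, Relation.ReflTransGen.refl⟩
  · rintro ⟨s, hoks, hbs, hpath⟩
    induction hpath with
    | refl => exact r1 s ((hseed s).2 ⟨hoks, hbs⟩)
    | tail h1 h2 ihx => exact r2 _ ihx _ h2.1 h2.2

theorem bfsA_eq_wl (n m : Int) (g : List (List Char)) :
    ∀ (fuel : Nat) (q : List (Int × Int)) (vis : PySem.Set (Int × Int)),
      bfsA n m g fuel q vis =
        wl n m (fun p => gridGet g p.1 p.2 = '0') fuel q vis := by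
  intro fuel
  induction fuel with
  | zero => intro q vis; rfl
  | succ fuel ih =>
    intro q vis
    match q with
    | [] => rfl
    | p :: q =>
      rw [bfsA, wl]
      exact ih _ _

theorem seedFold (P : Int × Int → Prop) [DecidablePred P] :
    ∀ (L : List (Int × Int)) (q : List (Int × Int)) (vis : PySem.Set (Int × Int)),
      (∀ x, x ∈ q ↔ x ∈ vis) → q.Nodup → vis.Nodup →
      (∀ x, x ∈ (L.foldl (fun qv p => if P p ∧ ¬ p ∈ qv.2
          then (qv.1 ++ [p], PySem.Set.add qv.2 p) else qv) (q, vis)).1 ↔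
        x ∈ (L.foldl (fun qv p => if P p ∧ ¬ p ∈ qv.2
          then (qv.1 ++ [p], PySem.Set.add qv.2 p) else qv) (q, vis)).2) ∧
      (L.foldl (fun qv p => if P p ∧ ¬ p ∈ qv.2
          then (qv.1 ++ [p], PySem.Set.add qv.2 p) else qv) (q, vis)).1.Nodup ∧
      (L.foldl (fun qv p => if P p ∧ ¬ p ∈ qv.2
          then (qv.1 ++ [p], PySem.Set.add qv.2 p) else qv) (q, vis)).2.Nodup ∧
      (∀ x, x ∈ (L.foldl (fun qv p => if P p ∧ ¬ p ∈ qv.2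
          then (qv.1 ++ [p], PySem.Set.add qv.2 p) else qv) (q, vis)).2 ↔
        x ∈ vis ∨ (x ∈ L ∧ P x)) := by
  intro L
  induction L with
  | nil =>
    intro q vis hqv hnq hnv
    refine ⟨hqv, hnq, hnv, ?_⟩
    intro x; simp
  | cons p L ih =>
    intro q vis hqv hnq hnv
    rw [List.foldl_cons]
    by_cases hc : P p ∧ ¬ p ∈ vis
    · rw [if_pos hc]
      have hpq : p ∉ q := fun h => hc.2 ((hqv p).1 h)
      obtain ⟨c1, c2, c3, c4⟩ := ih (q ++ [p]) (PySem.Set.add vis p)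
        (by
          intro x
          rw [List.mem_append, List.mem_singleton, PySem.Set.mem_add]
          exact or_congr_left (hqv x))
        (by
          rw [List.nodup_append]
          refine ⟨hnq, List.nodup_singleton _, ?_⟩
          intro a ha
          simp only [List.mem_singleton]
          intro b hb
          subst hb
          intro he
          exact hpq (he ▸ ha))
        (PySem.Set.nodup_add _ _ hnv)
      refine ⟨c1, c2, c3, ?_⟩
      intro x
      rw [c4 x, PySem.Set.mem_add]
      constructor
      · rintro ((hx | rfl) | ⟨hxL, hPx⟩)
        · exact Or.inl hx
        · exact Or.inr ⟨List.mem_cons_self .., hc.1⟩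
        · exact Or.inr ⟨List.mem_cons_of_mem _ hxL, hPx⟩
      · rintro (hx | ⟨hxL, hPx⟩)
        · exact Or.inl (Or.inl hx)
        · rcases List.mem_cons.1 hxL with rfl | hxL
          · exact Or.inl (Or.inr rfl)
          · exact Or.inr ⟨hxL, hPx⟩
    · rw [if_neg hc]
      obtain ⟨c1, c2, c3, c4⟩ := ih q vis hqv hnq hnv
      refine ⟨c1, c2, c3, ?_⟩
      intro x
      rw [c4 x]
      constructor
      · rintro (hx | ⟨hxL, hPx⟩)
        · exact Or.inl hx
        · exact Or.inr ⟨List.mem_cons_of_mem _ hxL, hPx⟩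
      · rintro (hx | ⟨hxL, hPx⟩)
        · exact Or.inl hx
        · rcases List.mem_cons.1 hxL with rfl | hxL
          · rcases Classical.em (x ∈ vis) with h | h
            · exact Or.inl h
            · exact absurd ⟨hPx, h⟩ hc
          · exact Or.inr ⟨hxL, hPx⟩

-- ---------- grid cell helpers (A side) ----------

def rowsOk (g : List (List Char)) (N M : Nat) : Prop :=
  g.length = N ∧ ∀ i, i < N → M ≤ (g[i]?.getD []).length

theorem gridGet_nonneg (g : List (List Char)) (r c : Int) (hr : 0 ≤ r) (hc : 0 ≤ c) :
    gridGet g r c = ((g[r.toNat]?.getD [])[c.toNat]?).getD ' ' := by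
  rw [gridGet, PySem.List.pyGet?_of_nonneg _ hr, PySem.List.pyGet?_of_nonneg _ hc]

theorem gridSet_nonneg (g : List (List Char)) (r c : Int) (v : Char)
    (hr : 0 ≤ r) (hc : 0 ≤ c) :
    gridSet g r c v = g.set r.toNat ((g[r.toNat]?.getD []).set c.toNat v) := by
  rw [gridSet, PySem.List.pySetD_of_nonneg _ _ hr, PySem.List.pyGet?_of_nonneg _ hr,
    PySem.List.pySetD_of_nonneg _ _ hc]

theorem rowsOk_gridSet (g : List (List Char)) (N M : Nat) (a b : Int) (v : Char)
    (ha : 0 ≤ a) (hb : 0 ≤ b) (h : rowsOk g N M) : rowsOk (gridSet g a b v) N M := by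
  rw [gridSet_nonneg g a b v ha hb]
  refine ⟨by rw [List.length_set]; exact h.1, ?_⟩
  intro i hi
  rw [List.getElem?_set]
  by_cases hia : a.toNat = i
  · rw [if_pos hia]
    by_cases hlen : a.toNat < g.length
    · rw [if_pos hlen]
      simp only [Option.getD_some, List.length_set]
      exact hia ▸ h.2 a.toNat (hia ▸ hi)
    · exfalso
      have hg := h.1
      omega
  · rw [if_neg hia]
    exact h.2 i hi

theorem gridGet_gridSet (g : List (List Char)) (N M : Nat) (a b r c : Int) (v : Char)
    (hrows : rowsOk g N M)
    (ha : 0 ≤ a) (haN : a.toNat < N) (hb : 0 ≤ b) (hbM : b.toNat < M)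
    (hr : 0 ≤ r) (hc : 0 ≤ c) :
    gridGet (gridSet g a b v) r c = if r = a ∧ c = b then v else gridGet g r c := by
  rw [gridSet_nonneg g a b v ha hb, gridGet_nonneg _ r c hr hc,
    gridGet_nonneg g r c hr hc]
  have hgl : a.toNat < g.length := by rw [hrows.1]; exact haN
  have hrow : b.toNat < (g[a.toNat]?.getD []).length := by
    have := hrows.2 a.toNat haN
    omega
  rw [List.getElem?_set]
  by_cases hra : r = a
  · subst hra
    rw [if_pos rfl, if_pos hgl]
    simp only [Option.getD_some]
    rw [List.getElem?_set]
    by_cases hcb : c = b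
    · subst hcb
      rw [if_pos rfl, if_pos hrow]
      simp
    · have h1 : ¬ (b.toNat = c.toNat) := by omega
      rw [if_neg h1, if_neg (fun h => hcb h.2)]
  · have h1 : ¬ (a.toNat = r.toNat) := by omega
    rw [if_neg h1, if_neg (fun h => hra h.1)]

theorem gridGet_foldSet (N M : Nat) (v : Char) :
    ∀ (T : List (Int × Int)) (g : List (List Char)), rowsOk g N M →
      (∀ p ∈ T, 0 ≤ p.1 ∧ p.1.toNat < N ∧ 0 ≤ p.2 ∧ p.2.toNat < M) →
      ∀ (r c : Int), 0 ≤ r → 0 ≤ c →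
      gridGet (T.foldl (fun g p => gridSet g p.1 p.2 v) g) r c =
        if (r, c) ∈ T then v else gridGet g r c := by
  intro T
  induction T with
  | nil => intro g _ _ r c _ _; simp
  | cons p T ih =>
    intro g hrows hT r c hr hc
    rw [List.foldl_cons]
    have hp := hT p (List.mem_cons_self ..)
    have hrows' := rowsOk_gridSet g N M p.1 p.2 v hp.1 hp.2.2.1 hrows
    rw [ih _ hrows' (fun x hx => hT x (List.mem_cons_of_mem _ hx)) r c hr hc]
    rw [gridGet_gridSet g N M p.1 p.2 r c v hrows hp.1 hp.2.1 hp.2.2.1 hp.2.2.2 hr hc]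
    by_cases hrc : (r, c) ∈ T
    · rw [if_pos hrc, if_pos (List.mem_cons_of_mem _ hrc)]
    · rw [if_neg hrc]
      by_cases hpc : r = p.1 ∧ c = p.2
      · rw [if_pos hpc, if_pos (by rw [show (r, c) = p from Prod.ext hpc.1 hpc.2]; exact List.mem_cons_self ..)]
      · rw [if_neg hpc, if_neg ?_]
        intro h
        rcases List.mem_cons.1 h with h | h
        · exact hpc ⟨congrArg Prod.fst h, congrArg Prod.snd h⟩
        · exact hrc h

theorem rowsOk_foldSet (N M : Nat) (v : Char) :
    ∀ (T : List (Int × Int)) (g : List (List Char)), rowsOk g N M →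
      (∀ p ∈ T, 0 ≤ p.1 ∧ 0 ≤ p.2) →
      rowsOk (T.foldl (fun g p => gridSet g p.1 p.2 v) g) N M := by
  intro T
  induction T with
  | nil => intro g h _; exact h
  | cons p T ih =>
    intro g hrows hT
    rw [List.foldl_cons]
    exact ih _ (rowsOk_gridSet g N M p.1 p.2 v (hT p (List.mem_cons_self ..)).1
      (hT p (List.mem_cons_self ..)).2 hrows) (fun x hx => hT x (List.mem_cons_of_mem _ hx))

theorem posBuild (key : Int × Int → Char) :
    ∀ (L : List (Int × Int)) (d : PySem.Dict Char (PySem.Set (Int × Int))),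
      L.Nodup → (∀ ch p, p ∈ d.getD ch [] → p ∉ L) →
      ∀ ch, (L.foldl (fun d p => d.modify (key p) [] (fun s => PySem.Set.add s p)) d).getD ch [] =
        d.getD ch [] ++ (L.filter (fun p => key p == ch)) := by
  intro L
  induction L with
  | nil => intro d _ _ ch; simp
  | cons p L ih =>
    intro d hnd hfresh ch
    rw [List.foldl_cons]
    have hfresh' : ∀ ch' p', p' ∈ (d.modify (key p) [] (fun s => PySem.Set.add s p)).getD ch' [] → p' ∉ L := by
      intro ch' p' hp'
      by_cases hk : ch' = key p
      · subst hk
        rw [PySem.Dict.getD_modify_self] at hp'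
        rcases (PySem.Set.mem_add _ _ _).1 hp' with h | rfl
        · exact fun hl => hfresh _ p' h (List.mem_cons_of_mem _ hl)
        · exact (List.nodup_cons.1 hnd).1
      · rw [PySem.Dict.getD_modify_of_ne _ _ _ hk] at hp'
        exact fun hl => hfresh ch' p' hp' (List.mem_cons_of_mem _ hl)
    rw [ih _ (List.nodup_cons.1 hnd).2 hfresh' ch, List.filter_cons]
    by_cases hk : key p == ch
    · have hkeq : key p = ch := by simpa using hk
      rw [if_pos hk, ← hkeq, PySem.Dict.getD_modify_self]
      have hpd : p ∉ d.getD (key p) [] := fun h => hfresh (key p) p h (List.mem_cons_self ..)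
      rw [PySem.Set.add_of_not_mem hpd]
      simp
    · have hkne : ¬ (ch = key p) := fun h => by simp [h] at hk
      rw [if_neg (by simpa using hk), PySem.Dict.getD_modify_of_ne _ _ _ hkne]

theorem foldRemove : ∀ (ds l : List (Int × Int)), l.Nodup →
    ds.foldl (fun (s : PySem.Set (Int × Int)) p => (PySem.Set.remove? s p).getD s) l =
      l.filter (fun x => decide (x ∉ ds)) := by
  intro ds
  induction ds with
  | nil => intro l _; simp
  | cons d ds ih =>
    intro l hnl
    rw [List.foldl_cons]
    have hstep : (PySem.Set.remove? l d).getD l = l.filter (fun x => x != d) := by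
      by_cases hd : d ∈ l
      · rw [PySem.Set.remove?_of_mem hd]
        simp only [Option.getD_some]
        simp [PySem.Set.discard, bne]
      · rw [(PySem.Set.remove?_eq_none_iff _ _).2 hd]
        simp only [Option.getD_none]
        symm
        apply List.filter_eq_self.2
        intro x hx
        simp only [bne_iff_ne, ne_eq]
        intro h
        subst h
        exact hd hx
    rw [hstep, ih _ (List.Nodup.filter _ hnl), List.filter_filter]
    apply List.filter_congr
    intro x _
    simp only [List.mem_cons, decide_not]
    by_cases h1 : x = d
    · subst h1; simp
    · by_cases h2 : x ∈ ds <;> simp [h1, h2]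

theorem Reach_congr (n m : Int) (e e' : Int × Int → Prop)
    (h : ∀ p, inR n m p → (e p ↔ e' p)) (x : Int × Int) :
    Reach n m e x ↔ Reach n m e' x := by
  have hok : ∀ p, okc n m e p ↔ okc n m e' p := by
    intro p
    exact and_congr_right (fun hp => h p hp)
  have hmono : ∀ (a b : Int × Int), Relation.ReflTransGen (stepR n m e) a b →
      Relation.ReflTransGen (stepR n m e') a b := by
    intro a b hab
    refine Relation.ReflTransGen.mono ?_ hab
    intro u v huv
    exact ⟨huv.1, (hok v).1 huv.2⟩
  have hmono' : ∀ (a b : Int × Int), Relation.ReflTransGen (stepR n m e') a b →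
      Relation.ReflTransGen (stepR n m e) a b := by
    intro a b hab
    refine Relation.ReflTransGen.mono ?_ hab
    intro u v huv
    exact ⟨huv.1, (hok v).2 huv.2⟩
  constructor
  · rintro ⟨s, hoks, hbs, hpath⟩
    exact ⟨s, (hok s).1 hoks, hbs, hmono _ _ hpath⟩
  · rintro ⟨s, hoks, hbs, hpath⟩
    exact ⟨s, (hok s).2 hoks, hbs, hmono' _ _ hpath⟩

theorem foldl_nested2 {β : Type} (f : β → Int → Int → β) (init : β) (n m : Int) :
    (PySem.List.pyRange 0 n 1).foldl (fun acc r =>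
      (PySem.List.pyRange 0 m 1).foldl (fun acc c => f acc r c) acc) init =
    (allCells n m).foldl (fun acc p => f acc p.1 p.2) init := by
  rw [allCells, List.foldl_flatMap]
  congr 1
  funext acc r
  rw [List.foldl_map]

theorem nodup_subset_length {α : Type} [DecidableEq α] (l₁ l₂ : List α)
    (h₁ : l₁.Nodup) (hsub : ∀ x ∈ l₁, x ∈ l₂) : l₁.length ≤ l₂.length :=
  (List.subperm_of_subset h₁ hsub).length_le

-- ---------- B's label-propagation fixpoint theory ----------

-- one cell of a sweep, as a step over the flattened cell list
def swStep (n m : Int) (occ : PySem.Set (Int × Int))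
    (st : PySem.Set (Int × Int) × Bool) (p : Int × Int) : PySem.Set (Int × Int) × Bool :=
  if p ∈ occ ∨ p ∈ st.1 then st
  else if reachableB n m st.1 p then (PySem.Set.add st.1 p, true) else st

theorem sweepB_eq_foldl (n m : Int) (occ : PySem.Set (Int × Int))
    (st : PySem.Set (Int × Int) × Bool) :
    sweepB n m occ st = (allCells n m).foldl (swStep n m occ) st := by
  rw [sweepB]
  exact foldl_nested2 (fun st r c => swStep n m occ st (r, c)) st n m

theorem reachableB_of_nbr (n m : Int) (out : PySem.Set (Int × Int)) (a b : Int × Int)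
    (ha : a ∈ out) (hb : b ∈ nbrs a) : reachableB n m out b = true := by
  rw [reachableB, decide_eq_true_eq]
  rcases (mem_nbrs_iff a b).1 hb with rfl | rfl | rfl | rfl
  · refine Or.inr (Or.inr (Or.inr (Or.inr (Or.inr (Or.inr (Or.inl ?_))))))
    simpa using ha
  · refine Or.inr (Or.inr (Or.inr (Or.inr (Or.inr (Or.inr (Or.inr ?_))))))
    simpa using ha
  · refine Or.inr (Or.inr (Or.inr (Or.inr (Or.inl ?_))))
    simpa using ha
  · refine Or.inr (Or.inr (Or.inr (Or.inr (Or.inr (Or.inl ?_)))))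
    simpa using ha

theorem Reach_of_reachableB (n m : Int) (occ : PySem.Set (Int × Int))
    (out : PySem.Set (Int × Int)) (p : Int × Int)
    (hout : ∀ x ∈ out, Reach n m (fun x => ¬ x ∈ occ) x)
    (hin : inR n m p) (hocc : ¬ p ∈ occ)
    (hrb : reachableB n m out p = true) : Reach n m (fun x => ¬ x ∈ occ) p := by
  rw [reachableB, decide_eq_true_eq] at hrb
  have hokp : okc n m (fun x => ¬ x ∈ occ) p := ⟨hin, hocc⟩
  rcases hrb with h | h | h | h | h | h | h | h
  · exact ⟨p, hokp, Or.inl h, Relation.ReflTransGen.refl⟩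
  · exact ⟨p, hokp, Or.inr (Or.inl h), Relation.ReflTransGen.refl⟩
  · exact ⟨p, hokp, Or.inr (Or.inr (Or.inl h)), Relation.ReflTransGen.refl⟩
  · exact ⟨p, hokp, Or.inr (Or.inr (Or.inr h)), Relation.ReflTransGen.refl⟩
  · refine Reach_tail n m _ _ p (hout _ h) ?_ hokp
    rw [mem_nbrs_iff]
    simp [Prod.ext_iff]
  · refine Reach_tail n m _ _ p (hout _ h) ?_ hokp
    rw [mem_nbrs_iff]
    simp [Prod.ext_iff]
  · refine Reach_tail n m _ _ p (hout _ h) ?_ hokp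
    rw [mem_nbrs_iff]
    simp [Prod.ext_iff]
  · refine Reach_tail n m _ _ p (hout _ h) ?_ hokp
    rw [mem_nbrs_iff]
    simp [Prod.ext_iff]

theorem swFold_facts (n m : Int) (occ : PySem.Set (Int × Int)) :
    ∀ (l : List (Int × Int)) (st : PySem.Set (Int × Int) × Bool),
      (∀ x ∈ st.1, x ∈ (l.foldl (swStep n m occ) st).1) ∧
      (st.1.Nodup → (l.foldl (swStep n m occ) st).1.Nodup) ∧
      (∀ x ∈ (l.foldl (swStep n m occ) st).1, x ∈ st.1 ∨ (x ∈ l ∧ ¬ x ∈ occ)) ∧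
      ((∀ x ∈ st.1, Reach n m (fun p => ¬ p ∈ occ) x) → (∀ p ∈ l, inR n m p) →
        ∀ x ∈ (l.foldl (swStep n m occ) st).1, Reach n m (fun p => ¬ p ∈ occ) x) ∧
      (st.2 = true → (l.foldl (swStep n m occ) st).2 = true) ∧
      st.1.length ≤ (l.foldl (swStep n m occ) st).1.length ∧
      (st.2 = false → (l.foldl (swStep n m occ) st).2 = true →
        st.1.length + 1 ≤ (l.foldl (swStep n m occ) st).1.length) ∧
      ((l.foldl (swStep n m occ) st).2 = false →
        (l.foldl (swStep n m occ) st).1 = st.1 ∧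
        ∀ p ∈ l, ¬ p ∈ occ → p ∉ st.1 → ¬ (reachableB n m st.1 p = true)) := by
  intro l
  induction l with
  | nil =>
    intro st
    refine ⟨fun x hx => hx, fun h => h, fun x hx => Or.inl hx, fun hR _ x hx => hR x hx,
      fun h => h, le_refl _, ?_, ?_⟩
    · intro h1 h2
      simp only [List.foldl_nil] at h2
      rw [h1] at h2
      exact absurd h2 (by simp)
    · intro _
      exact ⟨rfl, fun p hp => absurd hp (List.not_mem_nil)⟩
  | cons p l ih =>
    intro st
    rw [List.foldl_cons]
    by_cases hskip : p ∈ occ ∨ p ∈ st.1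
    · have hstep : swStep n m occ st p = st := by rw [swStep, if_pos hskip]
      rw [hstep]
      obtain ⟨c1, c2, c3, c4, c5, c6, c7, c8⟩ := ih st
      refine ⟨c1, c2, ?_, fun hR hl => c4 hR (fun x hx => hl x (List.mem_cons_of_mem _ hx)),
        c5, c6, c7, ?_⟩
      · intro x hx
        rcases c3 x hx with h | ⟨h1, h2⟩
        · exact Or.inl h
        · exact Or.inr ⟨List.mem_cons_of_mem _ h1, h2⟩
      · intro hf
        obtain ⟨d1, d2⟩ := c8 hf
        refine ⟨d1, ?_⟩
        intro x hx hocc hst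
        rcases List.mem_cons.1 hx with rfl | hx
        · rcases hskip with h | h
          · exact absurd h hocc
          · exact absurd h hst
        · exact d2 x hx hocc hst
    · by_cases hcond : reachableB n m st.1 p = true
      · have hstep : swStep n m occ st p = (PySem.Set.add st.1 p, true) := by
          rw [swStep, if_neg hskip, if_pos hcond]
        have hpnot : p ∉ st.1 := fun h => hskip (Or.inr h)
        have hpocc : ¬ p ∈ occ := fun h => hskip (Or.inl h)
        have hadd : PySem.Set.add st.1 p = st.1 ++ [p] := PySem.Set.add_of_not_mem hpnot
        rw [hstep]
        obtain ⟨c1, c2, c3, c4, c5, c6, c7, c8⟩ := ih (PySem.Set.add st.1 p, true)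
        have hmemadd : ∀ x, x ∈ PySem.Set.add st.1 p ↔ x ∈ st.1 ∨ x = p :=
          fun x => PySem.Set.mem_add _ _ _
        have hlen : (PySem.Set.add st.1 p).length = st.1.length + 1 := by
          rw [hadd]; simp
        refine ⟨?_, ?_, ?_, ?_, fun _ => c5 rfl, ?_, ?_, ?_⟩
        · intro x hx
          exact c1 x ((hmemadd x).2 (Or.inl hx))
        · intro hnd
          exact c2 (PySem.Set.nodup_add _ _ hnd)
        · intro x hx
          rcases c3 x hx with h | ⟨h1, h2⟩
          · rcases (hmemadd x).1 h with h' | rfl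
            · exact Or.inl h'
            · exact Or.inr ⟨List.mem_cons_self .., hpocc⟩
          · exact Or.inr ⟨List.mem_cons_of_mem _ h1, h2⟩
        · intro hR hl x hx
          refine c4 ?_ (fun y hy => hl y (List.mem_cons_of_mem _ hy)) x hx
          intro y hy
          rcases (hmemadd y).1 hy with h' | rfl
          · exact hR y h'
          · exact Reach_of_reachableB n m occ st.1 y hR
              (hl y (List.mem_cons_self ..)) hpocc hcond
        · have h6 : (PySem.Set.add st.1 p).length ≤
              (l.foldl (swStep n m occ) (PySem.Set.add st.1 p, true)).1.length := c6
          omega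
        · intro _ _
          have h6 : (PySem.Set.add st.1 p).length ≤
              (l.foldl (swStep n m occ) (PySem.Set.add st.1 p, true)).1.length := c6
          omega
        · intro hf
          have := c5 rfl
          rw [this] at hf
          exact absurd hf (by simp)
      · have hstep : swStep n m occ st p = st := by
          rw [swStep, if_neg hskip, if_neg hcond]
        rw [hstep]
        obtain ⟨c1, c2, c3, c4, c5, c6, c7, c8⟩ := ih st
        refine ⟨c1, c2, ?_, fun hR hl => c4 hR (fun x hx => hl x (List.mem_cons_of_mem _ hx)),
          c5, c6, c7, ?_⟩
        · intro x hx
          rcases c3 x hx with h | ⟨h1, h2⟩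
          · exact Or.inl h
          · exact Or.inr ⟨List.mem_cons_of_mem _ h1, h2⟩
        · intro hf
          obtain ⟨d1, d2⟩ := c8 hf
          refine ⟨d1, ?_⟩
          intro x hx hocc hst
          rcases List.mem_cons.1 hx with rfl | hx
          · exact hcond
          · exact d2 x hx hocc hst

theorem fixB_mem (n m : Int) (occ : PySem.Set (Int × Int)) :
    ∀ (fuel : Nat) (out : PySem.Set (Int × Int)),
      out.Nodup → (∀ x ∈ out, x ∈ allCells n m) →
      (∀ x ∈ out, Reach n m (fun p => ¬ p ∈ occ) x) →
      n.toNat * m.toNat + 1 ≤ fuel + out.length →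
      ∀ x, x ∈ fixB n m occ fuel out ↔ Reach n m (fun p => ¬ p ∈ occ) x := by
  intro fuel
  induction fuel with
  | zero =>
    intro out hnd hsub _ hfuel
    have := nodup_subset_length out (allCells n m) hnd hsub
    rw [length_allCells] at this
    omega
  | succ fuel ih =>
    intro out hnd hsub hR hfuel
    rw [fixB]
    rw [sweepB_eq_foldl]
    obtain ⟨c1, c2, c3, c4, c5, c6, c7, c8⟩ := swFold_facts n m occ (allCells n m) (out, false)
    set st := (allCells n m).foldl (swStep n m occ) (out, false) with hstdef
    have hInRall : ∀ p ∈ allCells n m, inR n m p := fun p hp => (mem_allCells n m p).1 hp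
    by_cases hflag : st.2 = true
    · rw [if_pos hflag]
      refine ih st.1 (c2 hnd) ?_ (c4 hR hInRall) ?_
      · intro x hx
        rcases c3 x hx with h | ⟨h1, _⟩
        · exact hsub x h
        · exact h1
      · have h7 : out.length + 1 ≤ st.1.length := c7 rfl hflag
        omega
    · rw [if_neg hflag]
      obtain ⟨d1, d2⟩ := c8 (by simpa using hflag)
      rw [d1]
      intro x
      constructor
      · exact hR x
      · rintro ⟨s, hoks, hbs, hpath⟩
        -- the fixpoint is closed under the propagation step; induct along the path
        have hbase : s ∈ out := by
          by_contra hs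
          refine d2 s ((mem_allCells n m s).2 hoks.1) hoks.2 hs ?_
          rw [reachableB, decide_eq_true_eq]
          rcases hbs with h | h | h | h
          · exact Or.inl h
          · exact Or.inr (Or.inl h)
          · exact Or.inr (Or.inr (Or.inl h))
          · exact Or.inr (Or.inr (Or.inr (Or.inl h)))
        clear hbs hoks
        induction hpath with
        | refl => exact hbase
        | tail h1 h2 ihp =>
          rename_i b c
          by_contra hc
          refine d2 c ((mem_allCells n m c).2 h2.2.1) h2.2.2 hc ?_
          exact reachableB_of_nbr n m out b c ihp h2.1

-- ---------- B's association-list state ----------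

def pairGet : List ((Int × Int) × Char) → (Int × Int) → Option Char
  | [], _ => none
  | e :: t, p => if e.1 = p then some e.2 else pairGet t p

theorem pairGet_eq_some_iff (cells : List ((Int × Int) × Char))
    (hnd : (cells.map (·.1)).Nodup) (p : Int × Int) (ch : Char) :
    pairGet cells p = some ch ↔ (p, ch) ∈ cells := by
  induction cells with
  | nil => simp [pairGet]
  | cons e t ih =>
    rw [List.map_cons, List.nodup_cons] at hnd
    rw [pairGet]
    by_cases he : e.1 = p
    · rw [if_pos he]
      simp only [Option.some.injEq, List.mem_cons]
      constructor
      · intro h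
        exact Or.inl (Prod.ext he h).symm
      · rintro (h | h)
        · exact (congrArg Prod.snd h).symm
        · exfalso
          exact hnd.1 (he ▸ (List.mem_map.2 ⟨(p, ch), h, rfl⟩))
    · rw [if_neg he, ih hnd.2, List.mem_cons]
      constructor
      · exact Or.inr
      · rintro (h | h)
        · exact absurd (congrArg Prod.fst h).symm he
        · exact h

theorem pairGet_eq_none_iff (cells : List ((Int × Int) × Char)) (p : Int × Int) :
    pairGet cells p = none ↔ p ∉ cells.map (·.1) := by
  induction cells with
  | nil => simp [pairGet]
  | cons e t ih =>
    rw [pairGet, List.map_cons]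
    by_cases he : e.1 = p
    · rw [if_pos he]
      constructor
      · intro h
        exact absurd h (by simp)
      · intro h
        exact absurd (List.mem_cons.2 (Or.inl he.symm)) h
    · rw [if_neg he, ih]
      simp only [List.mem_cons, not_or]
      constructor
      · intro h
        exact ⟨fun hh => he hh.symm, h⟩
      · intro h
        exact h.2

theorem nodup_keys_filter (cells : List ((Int × Int) × Char)) (keep : (Int × Int) × Char → Bool)
    (hnd : (cells.map (·.1)).Nodup) : ((cells.filter keep).map (·.1)).Nodup :=
  List.Sublist.nodup (List.Sublist.map _ List.filter_sublist) hnd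

theorem pairGet_filter (cells : List ((Int × Int) × Char))
    (hnd : (cells.map (·.1)).Nodup) (keep : (Int × Int) × Char → Bool) (p : Int × Int) :
    pairGet (cells.filter keep) p =
      match pairGet cells p with
      | some ch => if keep (p, ch) then some ch else none
      | none => none := by
  cases hg : pairGet cells p with
  | some ch =>
    show pairGet (cells.filter keep) p = if keep (p, ch) = true then some ch else none
    have hmem : (p, ch) ∈ cells := (pairGet_eq_some_iff cells hnd p ch).1 hg
    by_cases hk : keep (p, ch)
    · rw [if_pos hk]
      exact (pairGet_eq_some_iff _ (nodup_keys_filter cells keep hnd) p ch).2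
        (List.mem_filter.2 ⟨hmem, hk⟩)
    · rw [if_neg hk]
      rw [pairGet_eq_none_iff]
      intro hc
      obtain ⟨e, he, hfst⟩ := List.mem_map.1 hc
      have hef : e ∈ cells := List.mem_of_mem_filter he
      have : e = (p, ch) := by
        have h1 : pairGet cells e.1 = some e.2 :=
          (pairGet_eq_some_iff cells hnd e.1 e.2).2 (by simpa using hef)
        rw [hfst] at h1
        rw [hg] at h1
        obtain rfl := Option.some.inj h1.symm
        exact Prod.ext hfst rfl
      rw [this] at he
      exact absurd (List.of_mem_filter he) (by simp [hk])
  | none =>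
    show pairGet (cells.filter keep) p = none
    rw [pairGet_eq_none_iff] at hg ⊢
    intro hc
    obtain ⟨e, he, hfst⟩ := List.mem_map.1 hc
    exact hg (List.mem_map.2 ⟨e, List.mem_of_mem_filter he, hfst⟩)

theorem pairs_key_unique (cells : List ((Int × Int) × Char))
    (hnd : (cells.map (·.1)).Nodup) {p : Int × Int} {ch ch' : Char}
    (h1 : (p, ch) ∈ cells) (h2 : (p, ch') ∈ cells) : ch = ch' := by
  have g1 := (pairGet_eq_some_iff cells hnd p ch).2 h1
  have g2 := (pairGet_eq_some_iff cells hnd p ch').2 h2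
  rw [g1] at g2
  exact Option.some.inj g2

theorem mem_occFold (occ0 : PySem.Set (Int × Int)) :
    ∀ (l : List ((Int × Int) × Char)) (x : Int × Int),
      x ∈ l.foldl (fun s e => if e.2 ≠ '0' then PySem.Set.add s e.1 else s) occ0 ↔
        x ∈ occ0 ∨ ∃ e ∈ l, e.1 = x ∧ e.2 ≠ '0' := by
  intro l
  induction l generalizing occ0 with
  | nil => intro x; simp
  | cons e t ih =>
    intro x
    rw [List.foldl_cons]
    by_cases he : e.2 ≠ '0'
    · rw [if_pos he, ih]
      rw [PySem.Set.mem_add]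
      constructor
      · rintro ((h | rfl) | h)
        · exact Or.inl h
        · exact Or.inr ⟨e, List.mem_cons_self .., rfl, he⟩
        · obtain ⟨e', he', h1, h2⟩ := h
          exact Or.inr ⟨e', List.mem_cons_of_mem _ he', h1, h2⟩
      · rintro (h | ⟨e', he', h1, h2⟩)
        · exact Or.inl (Or.inl h)
        · rcases List.mem_cons.1 he' with rfl | he'
          · exact Or.inl (Or.inr h1.symm)
          · exact Or.inr ⟨e', he', h1, h2⟩
    · rw [if_neg he, ih]
      constructor
      · rintro (h | ⟨e', he', h1, h2⟩)
        · exact Or.inl h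
        · exact Or.inr ⟨e', List.mem_cons_of_mem _ he', h1, h2⟩
      · rintro (h | ⟨e', he', h1, h2⟩)
        · exact Or.inl h
        · rcases List.mem_cons.1 he' with rfl | he'
          · exact absurd h2 (by simpa using he)
          · exact Or.inr ⟨e', he', h1, h2⟩

theorem length_filter_split {α : Type} (l : List α) (p : α → Bool) :
    (l.filter p).length + (l.filter (fun x => !p x)).length = l.length :=
  (List.length_eq_length_filter_add p).symm

-- ---------- the simulation invariant between A's and B's states ----------

def InvAB (N M : Nat) (gA : List (List Char)) (pos : PySem.Dict Char (PySem.Set (Int × Int)))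
    (ans : Int) (cells : List ((Int × Int) × Char)) : Prop :=
  rowsOk gA N M ∧
  (cells.map (·.1)).Nodup ∧
  (∀ e ∈ cells, e.1 ∈ allCells (N : Int) (M : Int)) ∧
  (∀ r c : Int, 0 ≤ r → r < (N : Int) → 0 ≤ c → c < (M : Int) →
    gridGet gA r c = (pairGet cells (r, c)).getD '0') ∧
  (∀ ch : Char, pos.getD ch [] =
    (allCells (N : Int) (M : Int)).filter (fun p => decide ((p, ch) ∈ cells))) ∧
  ans = (cells.length : Int)

theorem filter_not_mem_self (L : List (Int × Int)) :
    L.filter (fun x => decide (x ∉ L)) = [] := by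
  rw [List.filter_eq_nil_iff]
  intro a ha
  simp [ha]

theorem update_Inv (N M : Nat) (gA : List (List Char))
    (pos : PySem.Dict Char (PySem.Set (Int × Int))) (ans : Int)
    (cells : List ((Int × Int) × Char))
    (hInv : InvAB N M gA pos ans cells) (typ : Char)
    (keep : (Int × Int) × Char → Bool)
    (hkeep_other : ∀ e : (Int × Int) × Char, e.2 ≠ typ → keep e = true)
    (T : List (Int × Int)) (hTnodup : T.Nodup)
    (hTchar : ∀ p, p ∈ T ↔ ∃ ch, (p, ch) ∈ cells ∧ keep (p, ch) = false) :
    InvAB N M (T.foldl (fun g p => gridSet g p.1 p.2 '0') gA)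
      (pos.insert typ ((pos.getD typ []).filter (fun x => decide (x ∉ T))))
      (ans - PySem.List.len T)
      (cells.filter keep) := by
  obtain ⟨hrowsA, hnd, hkeys, hgrid, hpos, hans⟩ := hInv
  have hTA : ∀ p ∈ T, p ∈ allCells (N : Int) (M : Int) := by
    intro p hp
    obtain ⟨ch, hc, _⟩ := (hTchar p).1 hp
    exact hkeys (p, ch) hc
  have hTb : ∀ p ∈ T, 0 ≤ p.1 ∧ p.1.toNat < N ∧ 0 ≤ p.2 ∧ p.2.toNat < M := by
    intro p hp
    have := (mem_allCells _ _ p).1 (hTA p hp)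
    obtain ⟨h1, h2, h3, h4⟩ := this
    refine ⟨h1, ?_, h3, ?_⟩ <;> omega
  have hgA' : ∀ (r c : Int), 0 ≤ r → 0 ≤ c →
      gridGet (T.foldl (fun g p => gridSet g p.1 p.2 '0') gA) r c =
        if (r, c) ∈ T then '0' else gridGet gA r c :=
    fun r c hr hc => gridGet_foldSet N M '0' T gA hrowsA hTb r c hr hc
  have hkeepT : ∀ p ch, (p, ch) ∈ cells → (p ∈ T ↔ keep (p, ch) = false) := by
    intro p ch hmem
    constructor
    · intro hp
      obtain ⟨ch', hmem', hk'⟩ := (hTchar p).1 hp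
      rwa [pairs_key_unique cells hnd hmem hmem']
    · intro hk
      exact (hTchar p).2 ⟨ch, hmem, hk⟩
  refine ⟨?_, nodup_keys_filter cells keep hnd, ?_, ?_, ?_, ?_⟩
  · exact rowsOk_foldSet N M '0' T gA hrowsA
      (fun p hp => ⟨(hTb p hp).1, (hTb p hp).2.2.1⟩)
  · intro e he
    exact hkeys e (List.mem_of_mem_filter he)
  · intro r c hr hrN hc hcM
    rw [hgA' r c hr hc, pairGet_filter cells hnd keep (r, c)]
    cases hg : pairGet cells (r, c) with
    | some ch =>
      show (if (r, c) ∈ T then '0' else gridGet gA r c) =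
        (if keep ((r, c), ch) = true then some ch else none).getD '0'
      have hmem : ((r, c), ch) ∈ cells := (pairGet_eq_some_iff cells hnd _ _).1 hg
      by_cases hk : keep ((r, c), ch) = true
      · rw [if_pos hk]
        have hnT : (r, c) ∉ T := fun h => by
          rw [(hkeepT _ _ hmem).1 h] at hk
          exact absurd hk (by simp)
        rw [if_neg hnT, hgrid r c hr hrN hc hcM, hg]
      · have hk' : keep ((r, c), ch) = false := by simpa using hk
        have hT : (r, c) ∈ T := (hkeepT _ _ hmem).2 hk'
        simp [hT, hk']
    | none =>
      show (if (r, c) ∈ T then '0' else gridGet gA r c) = (Option.none (α := Char)).getD '0'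
      have hnT : (r, c) ∉ T := by
        intro h
        obtain ⟨ch, hmem, _⟩ := (hTchar _).1 h
        rw [(pairGet_eq_some_iff cells hnd _ _).2 hmem] at hg
        exact absurd hg (by simp)
      rw [if_neg hnT, hgrid r c hr hrN hc hcM, hg]
  · intro ch
    by_cases hch : ch = typ
    · subst hch
      rw [PySem.Dict.getD_insert_self, hpos ch, List.filter_filter]
      apply List.filter_congr
      intro p hp
      rw [← Bool.decide_and]
      simp only [decide_eq_decide]
      constructor
      · rintro ⟨hnT, hmem⟩
        refine List.mem_filter.2 ⟨hmem, ?_⟩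
        by_contra hk
        exact hnT ((hkeepT p ch hmem).2 (by simpa using hk))
      · intro hmem
        obtain ⟨hm, hk⟩ := List.mem_filter.1 hmem
        refine ⟨fun hT => ?_, hm⟩
        rw [(hkeepT p ch hm).1 hT] at hk
        exact absurd hk (by simp)
    · rw [PySem.Dict.getD_insert_of_ne _ _ _ hch, hpos ch]
      apply List.filter_congr
      intro p hp
      simp only [decide_eq_decide]
      constructor
      · intro hmem
        exact List.mem_filter.2 ⟨hmem, hkeep_other (p, ch) hch⟩
      · exact List.mem_of_mem_filter
  · -- |cells| = |kept| + |removed| and |removed| = |T|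
    have hsplit := length_filter_split cells keep
    have hTlen : (cells.filter (fun e => !keep e)).length = T.length := by
      have hmemiff : ∀ x, x ∈ (cells.filter (fun e => !keep e)).map (·.1) ↔ x ∈ T := by
        intro x
        rw [List.mem_map]
        constructor
        · rintro ⟨e, he, rfl⟩
          obtain ⟨hm, hk⟩ := List.mem_filter.1 he
          exact (hTchar e.1).2 ⟨e.2, by simpa using hm, by simpa using hk⟩
        · intro hx
          obtain ⟨ch, hm, hk⟩ := (hTchar x).1 hx
          exact ⟨(x, ch), List.mem_filter.2 ⟨hm, by simp [hk]⟩, rfl⟩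
      have hperm := (List.perm_ext_iff_of_nodup
        (nodup_keys_filter cells (fun e => !keep e) hnd) hTnodup).2 hmemiff
      have := hperm.length_eq
      simpa using this
    rw [hans, PySem.List.len_eq]
    have : (cells.filter keep).length + T.length = cells.length := by omega
    omega

-- ---------- per-request preservation ----------

set_option maxHeartbeats 2000000 in
theorem step_preserve (N M : Nat)
    (gA : List (List Char)) (pos : PySem.Dict Char (PySem.Set (Int × Int))) (ans : Int)
    (cells : List ((Int × Int) × Char))
    (hInv : InvAB N M gA pos ans cells) (rs : String) :
    InvAB N M (stepA (N : Int) (M : Int) (gA, pos, ans) rs).1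
      (stepA (N : Int) (M : Int) (gA, pos, ans) rs).2.1
      (stepA (N : Int) (M : Int) (gA, pos, ans) rs).2.2
      (stepBB (N : Int) (M : Int) cells rs) := by
  have hnd := hInv.2.1
  have hkeys := hInv.2.2.1
  have hpos := hInv.2.2.2.2.1
  set n : Int := (N : Int) with hn
  set m : Int := (M : Int) with hm
  set typ : Char := (PySem.Str.pyGet? rs 0).getD ' ' with htyp
  set L : List (Int × Int) :=
    (allCells n m).filter (fun p => decide ((p, typ) ∈ cells)) with hLdef
  have hLnodup : L.Nodup := List.Nodup.filter _ (nodup_allCells n m)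
  have hLmem : ∀ p, p ∈ L ↔ p ∈ allCells n m ∧ (p, typ) ∈ cells := by
    intro p
    rw [hLdef, List.mem_filter]
    simp
  by_cases hlen : PySem.Str.len rs = 2
  · -- forklift request: remove every cell of this type
    rw [stepA, stepBB]
    simp only [if_pos hlen]
    rw [hpos typ, ← hLdef]
    by_cases hnil : L = []
    · rw [if_pos hnil]
      have hfix : cells.filter (fun e => decide (e.2 ≠ typ)) = cells := by
        apply List.filter_eq_self.2
        intro e he
        simp only [decide_eq_true_eq]
        intro hc
        have : e.1 ∈ L := (hLmem e.1).2 ⟨hkeys e he, by rw [← hc, Prod.mk.eta]; exact he⟩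
        rw [hnil] at this
        exact absurd this (List.not_mem_nil)
      rw [hfix]
      exact hInv
    · rw [if_neg hnil]
      have hupd := update_Inv N M gA pos ans cells hInv typ (fun e => decide (e.2 ≠ typ))
        (fun e he => by simpa using he) L hLnodup
        (by
          intro p
          rw [hLmem p]
          constructor
          · rintro ⟨_, hmem⟩
            exact ⟨typ, hmem, by simp⟩
          · rintro ⟨ch, hmem, hk⟩
            have : ch = typ := by simpa using hk
            exact ⟨hkeys (p, ch) hmem, this ▸ hmem⟩)
      rw [hpos typ, ← hLdef, filter_not_mem_self] at hupd
      exact hupd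
  · -- crane request
    rw [stepA, stepBB]
    simp only [if_neg hlen]
    -- A: the seed loop, flattened to a fold over allCells
    have hseedRW : (PySem.List.pyRange 0 n 1).foldl (fun qv r =>
        (PySem.List.pyRange 0 m 1).foldl
          (fun (qv : List (Int × Int) × PySem.Set (Int × Int)) c =>
            if gridGet gA r c = '0' ∧ (r = 0 ∨ r = n - 1 ∨ c = 0 ∨ c = m - 1) ∧ ¬ (r, c) ∈ qv.2
            then (qv.1 ++ [(r, c)], PySem.Set.add qv.2 (r, c)) else qv) qv) ([], []) =
        (allCells n m).foldl (fun qv p =>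
          if ((fun p : Int × Int => gridGet gA p.1 p.2 = '0') p ∧
              (p.1 = 0 ∨ p.1 = n - 1 ∨ p.2 = 0 ∨ p.2 = m - 1)) ∧ ¬ p ∈ qv.2
          then (qv.1 ++ [p], PySem.Set.add qv.2 p) else qv) ([], []) := by
      rw [foldl_nested2 (fun (qv : List (Int × Int) × PySem.Set (Int × Int)) r c =>
        if gridGet gA r c = '0' ∧ (r = 0 ∨ r = n - 1 ∨ c = 0 ∨ c = m - 1) ∧ ¬ (r, c) ∈ qv.2
        then (qv.1 ++ [(r, c)], PySem.Set.add qv.2 (r, c)) else qv) ([], []) n m]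
      congr 1
      funext qv p
      rw [Prod.mk.eta]
      exact if_congr (by tauto) rfl rfl
    rw [hseedRW]
    set qA : List (Int × Int) × PySem.Set (Int × Int) :=
      (allCells n m).foldl (fun qv p =>
        if ((fun p : Int × Int => gridGet gA p.1 p.2 = '0') p ∧
            (p.1 = 0 ∨ p.1 = n - 1 ∨ p.2 = 0 ∨ p.2 = m - 1)) ∧ ¬ p ∈ qv.2
        then (qv.1 ++ [p], PySem.Set.add qv.2 p) else qv) ([], []) with hqA
    obtain ⟨sc1, sc2, sc3, sc4⟩ :
        (∀ x, x ∈ qA.1 ↔ x ∈ qA.2) ∧ qA.1.Nodup ∧ qA.2.Nodup ∧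
        (∀ x, x ∈ qA.2 ↔ x ∈ ([] : List (Int × Int)) ∨
          (x ∈ allCells n m ∧ ((fun p : Int × Int => gridGet gA p.1 p.2 = '0') x ∧
            (x.1 = 0 ∨ x.1 = n - 1 ∨ x.2 = 0 ∨ x.2 = m - 1)))) :=
      seedFold (fun p : Int × Int => (fun p : Int × Int => gridGet gA p.1 p.2 = '0') p ∧
          (p.1 = 0 ∨ p.1 = n - 1 ∨ p.2 = 0 ∨ p.2 = m - 1))
        (allCells n m) [] [] (by intro x; simp) List.nodup_nil List.nodup_nil
    set outA : PySem.Set (Int × Int) :=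
      bfsA n m gA (5 * (n.toNat * m.toNat) + qA.1.length + 1) qA.1 qA.2 with houtAdef
    have houtA : ∀ x, x ∈ outA ↔ Reach n m (fun p : Int × Int => gridGet gA p.1 p.2 = '0') x := by
      rw [houtAdef, bfsA_eq_wl]
      refine wl_mem_iff n m _ _ qA.1 qA.2 sc1 sc2 sc3 ?_ ?_
      · intro y
        rw [sc4 y]
        constructor
        · rintro (h | ⟨hin, hP⟩)
          · exact absurd h (List.not_mem_nil)
          · exact ⟨⟨(mem_allCells n m y).1 hin, hP.1⟩, hP.2⟩
        · rintro ⟨⟨hinr, he'⟩, hb⟩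
          exact Or.inr ⟨(mem_allCells n m y).2 hinr, he', hb⟩
      · have h1 := List.countP_le_length
          (p := fun p => decide ((fun p : Int × Int => gridGet gA p.1 p.2 = '0') p ∧ p ∉ qA.2))
          (l := allCells n m)
        rw [length_allCells] at h1
        have h2 : Ecnt n m (fun p : Int × Int => gridGet gA p.1 p.2 = '0') qA.2 ≤ n.toNat * m.toNat := h1
        omega
    -- B: the occupied set and the fixpoint
    set occ : PySem.Set (Int × Int) :=
      cells.foldl (fun s e => if e.2 ≠ '0' then PySem.Set.add s e.1 else s) [] with hoccdef
    have hocc_mem : ∀ x, x ∈ occ ↔ ∃ e ∈ cells, e.1 = x ∧ e.2 ≠ '0' := by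
      intro x
      rw [hoccdef, mem_occFold]
      simp
    set outB : PySem.Set (Int × Int) :=
      fixB n m occ (n.toNat * m.toNat + 1) [] with houtBdef
    have houtB : ∀ x, x ∈ outB ↔ Reach n m (fun p => ¬ p ∈ occ) x := by
      rw [houtBdef]
      refine fixB_mem n m occ _ [] List.nodup_nil ?_ ?_ (by simp)
      · intro x hx; exact absurd hx (List.not_mem_nil)
      · intro x hx; exact absurd hx (List.not_mem_nil)
    -- the two emptiness predicates agree on the board, hence outside sets agree
    have he : ∀ p, inR n m p →
        ((fun p : Int × Int => gridGet gA p.1 p.2 = '0') p ↔ (fun p : Int × Int => ¬ p ∈ occ) p) := by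
      intro p hp
      have hg := hInv.2.2.2.2.1
      have hgrid := hInv.2.2.2.1 p.1 p.2 hp.1 hp.2.1 hp.2.2.1 hp.2.2.2
      simp only
      rw [hgrid, hocc_mem, Prod.mk.eta]
      cases hpg : pairGet cells p with
      | some ch =>
        have hmem : (p, ch) ∈ cells := (pairGet_eq_some_iff cells hnd p ch).1 hpg
        by_cases hch0 : ch = '0'
        · subst hch0
          simp only [Option.getD_some]
          constructor
          · intro _
            rintro ⟨e, hec, he1, hne⟩
            have hpe : (p, e.2) ∈ cells := by
              rw [← he1, Prod.mk.eta]
              exact hec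
            exact hne (pairs_key_unique cells hnd hpe hmem)
          · intro _
            trivial
        · simp only [Option.getD_some]
          constructor
          · intro h
            exact absurd h hch0
          · intro h
            exact absurd ⟨(p, ch), hmem, rfl, hch0⟩ h
      | none =>
        simp only [Option.getD_none]
        constructor
        · intro _
          rintro ⟨e, hec, he1, _⟩
          have hpe : pairGet cells e.1 = some e.2 :=
            (pairGet_eq_some_iff cells hnd e.1 e.2).2 (by simpa using hec)
          rw [he1, hpg] at hpe
          exact absurd hpe (by simp)
        · intro _
          trivial
    have hmem_out : ∀ y, y ∈ outA ↔ y ∈ outB := by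
      intro y
      rw [houtA y, houtB y]
      exact Reach_congr n m _ _ he y
    -- A's accessibility test ↔ B's reachable test
    have hacc : ∀ p : Int × Int,
        ((p.1 = 0 ∨ p.1 = n - 1 ∨ p.2 = 0 ∨ p.2 = m - 1) ∨
          pvDirs.any (fun d => PySem.Set.contains outA (p.1 + d.1, p.2 + d.2)) = true) ↔
        reachableB n m outB p = true := by
      intro p
      rw [reachableB, decide_eq_true_eq]
      simp only [pvDirs, List.any_cons, List.any_nil, Bool.or_eq_true, Bool.false_eq_true,
        or_false, PySem.Set.contains_iff, hmem_out]
      rw [show p.2 + -1 = p.2 - 1 from by omega, show p.1 + -1 = p.1 - 1 from by omega,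
        show p.1 + 0 = p.1 from by omega, show p.2 + 0 = p.2 from by omega]
      tauto
    -- locations
    rw [hpos typ, ← hLdef]
    by_cases hnil : L = []
    · rw [if_pos hnil]
      have hfix : cells.filter
          (fun e => decide (¬ (e.2 = typ ∧ reachableB n m outB e.1 = true))) = cells := by
        apply List.filter_eq_self.2
        intro e he
        simp only [decide_eq_true_eq]
        rintro ⟨hc, _⟩
        have : e.1 ∈ L := (hLmem e.1).2 ⟨hkeys e he, by rw [← hc, Prod.mk.eta]; exact he⟩
        rw [hnil] at this
        exact absurd this (List.not_mem_nil)
      rw [hfix]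
      exact hInv
    · rw [if_neg hnil]
      -- A's to_remove as a filter of L
      have hTA : L.foldl (fun (acc : List (Int × Int)) p =>
          if p.1 = 0 ∨ p.1 = n - 1 ∨ p.2 = 0 ∨ p.2 = m - 1 then acc ++ [p]
          else if pvDirs.any (fun d => PySem.Set.contains outA (p.1 + d.1, p.2 + d.2)) then acc ++ [p]
          else acc) [] =
          L.filter (fun p => decide ((p.1 = 0 ∨ p.1 = n - 1 ∨ p.2 = 0 ∨ p.2 = m - 1) ∨
            pvDirs.any (fun d => PySem.Set.contains outA (p.1 + d.1, p.2 + d.2)) = true)) := by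
        have hstep' : (fun (acc : List (Int × Int)) (p : Int × Int) =>
            if p.1 = 0 ∨ p.1 = n - 1 ∨ p.2 = 0 ∨ p.2 = m - 1 then acc ++ [p]
            else if pvDirs.any (fun d => PySem.Set.contains outA (p.1 + d.1, p.2 + d.2)) then acc ++ [p]
            else acc) =
            (fun (acc : List (Int × Int)) (p : Int × Int) =>
              if (p.1 = 0 ∨ p.1 = n - 1 ∨ p.2 = 0 ∨ p.2 = m - 1) ∨
                 pvDirs.any (fun d => PySem.Set.contains outA (p.1 + d.1, p.2 + d.2)) = true
              then acc ++ [p] else acc) := by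
          funext acc p
          by_cases h1 : p.1 = 0 ∨ p.1 = n - 1 ∨ p.2 = 0 ∨ p.2 = m - 1
          · rw [if_pos h1, if_pos (Or.inl h1)]
          · rw [if_neg h1]
            by_cases h2 : pvDirs.any (fun d => PySem.Set.contains outA (p.1 + d.1, p.2 + d.2)) = true
            · rw [if_pos h2, if_pos (Or.inr h2)]
            · rw [if_neg h2, if_neg (by tauto)]
        rw [hstep', PySem.List.foldl_append_ite_eq_filter _ L [], List.nil_append]
      rw [hTA]
      have hTA2 : L.filter (fun p => decide ((p.1 = 0 ∨ p.1 = n - 1 ∨ p.2 = 0 ∨ p.2 = m - 1) ∨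
            pvDirs.any (fun d => PySem.Set.contains outA (p.1 + d.1, p.2 + d.2)) = true)) =
          L.filter (fun p => reachableB n m outB p) := by
        apply List.filter_congr
        intro p _
        rcases hr : reachableB n m outB p with hv | hv
        · simp only [decide_eq_false_iff_not]
          intro hc
          rw [(hacc p).1 hc] at hr
          exact absurd hr (by simp)
        · simp only [decide_eq_true_eq]
          exact (hacc p).2 hr
      rw [hTA2]
      set T : List (Int × Int) := L.filter (fun p => reachableB n m outB p) with hTdef
      have hTnodup : T.Nodup := List.Nodup.filter _ hLnodup
      have hTmem : ∀ p, p ∈ T ↔ (p ∈ allCells n m ∧ (p, typ) ∈ cells) ∧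
          reachableB n m outB p = true := by
        intro p
        rw [hTdef, List.mem_filter, hLmem p]
      have hTchar : ∀ p, p ∈ T ↔ ∃ ch, (p, ch) ∈ cells ∧
          (fun e : (Int × Int) × Char =>
            decide (¬ (e.2 = typ ∧ reachableB n m outB e.1 = true))) (p, ch) = false := by
        intro p
        rw [hTmem p]
        constructor
        · rintro ⟨⟨_, hmem⟩, hr⟩
          exact ⟨typ, hmem, by simp [hr]⟩
        · rintro ⟨ch, hmem, hk⟩
          simp only [decide_eq_false_iff_not, not_not] at hk
          obtain ⟨rfl, hr⟩ := hk
          exact ⟨⟨hkeys (p, typ) hmem, hmem⟩, hr⟩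
      by_cases hTnil : T = []
      · rw [if_pos hTnil]
        have hfix : cells.filter
            (fun e => decide (¬ (e.2 = typ ∧ reachableB n m outB e.1 = true))) = cells := by
          apply List.filter_eq_self.2
          intro e he
          by_contra hker
          have hk : decide (¬ (e.2 = typ ∧ reachableB n m outB e.1 = true)) = false := by
            simpa using hker
          have : e.1 ∈ T := (hTchar e.1).2 ⟨e.2, by rw [Prod.mk.eta]; exact he,
            by rw [Prod.mk.eta]; exact hk⟩
          rw [hTnil] at this
          exact absurd this (List.not_mem_nil)
        rw [hfix]
        exact hInv
      · rw [if_neg hTnil]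
        have hupd := update_Inv N M gA pos ans cells hInv typ
          (fun e => decide (¬ (e.2 = typ ∧ reachableB n m outB e.1 = true)))
          (fun e he => by simp [he]) T hTnodup hTchar
        rw [foldRemove T L hLnodup]
        rw [hpos typ, ← hLdef] at hupd
        exact hupd

-- ---------- initialisation ----------

theorem strGet_eq (storage : List String) (r c : Int) (hr : 0 ≤ r) (hc : 0 ≤ c) :
    strGet storage r c = ((storage[r.toNat]?.getD "").toList[c.toNat]?).getD ' ' := by
  rw [strGet, PySem.List.pyGet?_of_nonneg _ hr, PySem.Str.pyGet?_eq,
    PySem.Chars.pyGet?_eq_listPyGet?, PySem.List.pyGet?_of_nonneg _ hc]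

theorem cells0_eq (storage : List String) (n m : Int) :
    (PySem.List.pyRange 0 n 1).flatMap (fun r =>
      (PySem.List.pyRange 0 m 1).map (fun c => ((r, c), strGet storage r c))) =
    (allCells n m).map (fun p => (p, strGet storage p.1 p.2)) := by
  rw [allCells, List.map_flatMap]
  congr 1
  funext r
  rw [List.map_map]
  rfl

theorem init_Inv (storage : List String) (_hne : storage ≠ [])
    (hrows : ∀ s ∈ storage, PySem.Str.len ((PySem.List.pyGet? storage 0).getD "") ≤ PySem.Str.len s) :
    InvAB storage.length (PySem.Str.len ((PySem.List.pyGet? storage 0).getD "")).toNat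
      (storage.map (·.toList))
      ((PySem.List.pyRange 0 (PySem.List.len storage) 1).foldl (fun pos r =>
        (PySem.List.pyRange 0 (PySem.Str.len ((PySem.List.pyGet? storage 0).getD "")) 1).foldl
          (fun (pos : PySem.Dict Char (PySem.Set (Int × Int))) c =>
            pos.modify (gridGet (storage.map (·.toList)) r c) []
              (fun s => PySem.Set.add s (r, c))) pos) PySem.Dict.empty)
      (PySem.List.len storage * PySem.Str.len ((PySem.List.pyGet? storage 0).getD ""))
      ((PySem.List.pyRange 0 (PySem.List.len storage) 1).flatMap (fun r =>
        (PySem.List.pyRange 0 (PySem.Str.len ((PySem.List.pyGet? storage 0).getD "")) 1).map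
          (fun c => ((r, c), strGet storage r c)))) := by
  set N : Nat := storage.length with hN
  set mI : Int := PySem.Str.len ((PySem.List.pyGet? storage 0).getD "") with hmI
  set M : Nat := mI.toNat with hM
  have hm0 : 0 ≤ mI := by rw [hmI, PySem.Str.len_eq]; positivity
  have hMI : (M : Int) = mI := by omega
  have hnI : PySem.List.len storage = (N : Int) := by rw [PySem.List.len_eq, hN]
  have hrowlen : ∀ i, i < N → M ≤ (storage[i]?.getD "").toList.length := by
    intro i hi
    have hg : storage[i]? = some storage[i] := List.getElem?_eq_getElem (by omega)
    have hmem : storage[i]?.getD "" ∈ storage := by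
      rw [hg]
      exact List.getElem_mem _
    have := hrows _ hmem
    rw [PySem.Str.len_eq] at this
    omega
  rw [hnI, ← hMI, cells0_eq]
  set cells0 : List ((Int × Int) × Char) :=
    (allCells (N : Int) (M : Int)).map (fun p => (p, strGet storage p.1 p.2)) with hc0
  have hgridrow : ∀ i : Nat, ((storage.map (·.toList))[i]?.getD []) = (storage[i]?.getD "").toList := by
    intro i
    rw [List.getElem?_map]
    cases hg : storage[i]? with
    | none => rfl
    | some s => rfl
  have hgrid : ∀ r c : Int, 0 ≤ r → 0 ≤ c →
      gridGet (storage.map (·.toList)) r c = strGet storage r c := by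
    intro r c hr hc
    rw [gridGet_nonneg _ r c hr hc, strGet_eq storage r c hr hc, hgridrow]
  have hkeysmap : cells0.map (·.1) = allCells (N : Int) (M : Int) := by
    have hcomp : ((fun x : (Int × Int) × Char => x.1) ∘
        (fun p : Int × Int => (p, strGet storage p.1 p.2))) = id := rfl
    rw [hc0, List.map_map, hcomp, List.map_id]
  have hndkeys : (cells0.map (·.1)).Nodup := by
    rw [hkeysmap]
    exact nodup_allCells _ _
  have hpg : ∀ p ∈ allCells (N : Int) (M : Int), pairGet cells0 p = some (strGet storage p.1 p.2) := by
    intro p hp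
    exact (pairGet_eq_some_iff cells0 hndkeys p _).2 (List.mem_map.2 ⟨p, hp, rfl⟩)
  refine ⟨?_, hndkeys, ?_, ?_, ?_, ?_⟩
  · refine ⟨by simp [hN], ?_⟩
    intro i hi
    rw [hgridrow i]
    exact hrowlen i hi
  · intro e he
    rw [hc0] at he
    obtain ⟨p, hp, rfl⟩ := List.mem_map.1 he
    exact hp
  · intro r c hr hrN hc hcM
    have hmem : (r, c) ∈ allCells (N : Int) (M : Int) :=
      (mem_allCells _ _ _).2 ⟨hr, hrN, hc, hcM⟩
    rw [hpg _ hmem, hgrid r c hr hc]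
    rfl
  · intro ch
    rw [foldl_nested2 (fun (pos : PySem.Dict Char (PySem.Set (Int × Int))) r c =>
      pos.modify (gridGet (storage.map (·.toList)) r c) []
        (fun s => PySem.Set.add s (r, c))) PySem.Dict.empty ((N : Nat) : Int) ((M : Nat) : Int)]
    have hfold := posBuild (fun p : Int × Int => gridGet (storage.map (·.toList)) p.1 p.2)
      (allCells ((N : Nat) : Int) ((M : Nat) : Int)) PySem.Dict.empty
      (nodup_allCells _ _)
      (by intro ch' p hp; rw [PySem.Dict.getD_empty] at hp; exact absurd hp (List.not_mem_nil))
      ch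
    rw [hfold, PySem.Dict.getD_empty, List.nil_append]
    apply List.filter_congr
    intro p hp
    have hpin := (mem_allCells ((N : Nat) : Int) ((M : Nat) : Int) p).1 hp
    rw [hgrid p.1 p.2 hpin.1 hpin.2.2.1]
    rcases Classical.em (strGet storage p.1 p.2 = ch) with h | h
    · simp only [h, beq_self_eq_true]
      symm
      rw [decide_eq_true_eq]
      rw [← h]
      exact List.mem_map.2 ⟨p, hp, rfl⟩
    · have hb : (strGet storage p.1 p.2 == ch) = false := by simpa using h
      rw [hb]
      symm
      rw [decide_eq_false_iff_not]
      intro hc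
      obtain ⟨q, hq, hqe⟩ := List.mem_map.1 hc
      have h1 : q = p := congrArg Prod.fst hqe
      have h2 : strGet storage q.1 q.2 = ch := congrArg Prod.snd hqe
      subst h1
      exact h h2
  · rw [hc0, List.length_map, length_allCells, Int.toNat_natCast, Int.toNat_natCast]
    push_cast
    ring

-- ===== VERDICT support =====

theorem solution_spec_aux (storage : List String) (reqs : List String)
    (hPre : Pre_solution storage reqs) :
    solution storage reqs = solution_alt storage reqs := by
  obtain ⟨hne, hrows, _⟩ := hPre
  rw [solution, solution_alt]
  set N : Nat := storage.length with hN
  set mI : Int := PySem.Str.len ((PySem.List.pyGet? storage 0).getD "") with hmI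
  have hm0 : 0 ≤ mI := by rw [hmI, PySem.Str.len_eq]; positivity
  set M : Nat := mI.toNat with hM
  have hMI : (M : Int) = mI := by omega
  have hnI : PySem.List.len storage = (N : Int) := by rw [PySem.List.len_eq, hN]
  have hInv0 := init_Inv storage hne hrows
  rw [← hmI, ← hN, hnI, ← hMI] at hInv0
  have hfold : ∀ (l : List String)
      (stA : List (List Char) × PySem.Dict Char (PySem.Set (Int × Int)) × Int)
      (cB : List ((Int × Int) × Char)),
      InvAB N M stA.1 stA.2.1 stA.2.2 cB →
      InvAB N M (l.foldl (stepA (N : Int) (M : Int)) stA).1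
        (l.foldl (stepA (N : Int) (M : Int)) stA).2.1
        (l.foldl (stepA (N : Int) (M : Int)) stA).2.2
        (l.foldl (stepBB (N : Int) (M : Int)) cB) := by
    intro l
    induction l with
    | nil => intro stA cB h; exact h
    | cons rs l ih =>
      intro stA cB h
      rw [List.foldl_cons, List.foldl_cons]
      exact ih _ _ (step_preserve N M stA.1 stA.2.1 stA.2.2 cB h rs)
  rw [hnI, ← hMI]
  have hfin := hfold reqs ((storage.map (·.toList)),
    ((PySem.List.pyRange 0 ((N : Nat) : Int) 1).foldl (fun pos r =>
      (PySem.List.pyRange 0 ((M : Nat) : Int) 1).foldl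
        (fun (pos : PySem.Dict Char (PySem.Set (Int × Int))) c =>
          pos.modify (gridGet (storage.map (·.toList)) r c) []
            (fun s => PySem.Set.add s (r, c))) pos) PySem.Dict.empty),
    ((N : Int) * (M : Int)))
    ((PySem.List.pyRange 0 ((N : Nat) : Int) 1).flatMap (fun r =>
      (PySem.List.pyRange 0 ((M : Nat) : Int) 1).map
        (fun c => ((r, c), strGet storage r c)))) hInv0
  have := hfin.2.2.2.2.2
  rw [PySem.List.len_eq]
  omega

-- ===== VERDICT (by name: the statement is the Claim_ definition above) =====
theorem solution_spec : Claim_equal_solution := by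
  unfold Claim_equal_solution
  intro storage reqs _ hPre
  unfold Spec_solution
  exact solution_spec_aux storage reqs hPre
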